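/- GENERATED by mk_final_copies.py from the proof of the farm's unit `init_blocksize` (farm:init_blocksize.2: Lemmas.lean) as the
   re-elaboration sweep compiled it — do not edit. -/
import Asan.CheckWalk
import Vorbis.Spec.Units.init_blocksize

/-!
  PURE LEMMAS OF THE UNIT `init_blocksize` (no machine code is walked here): the ghost bookkeeping of the five `setup_malloc`
  calls (`Carry`: what is carried from one call to the next), where `*f` lies relative to the arena's free gap, the footprint of a
  `setup_malloc` call inside this function's own, and the bit-level forms of the three sizes `4·(n>>1)`, `4·(n>>2)`, `2·(n>>3)`.
-/

namespace Vorbis.Spec.init_blocksize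
open X86 X86.User Asan Vorbis Vorbis.Spec

/-- **What init_blocksize carries from one call to the next**: the ghost arena `A'` and live list `others'` of NOW (after between 0
and 5 successful allocations) against those of the entry (`A`, `others`), with the two layers for the present memory. `top` is the
stack pointer of the body plus 8 (every callee is entered with the same rsp); `f` the decoder object. -/
structure Carry (others : List Obj) (frames : List (Nat × FrameLayout)) (A : Arena) (top f : Nat)
    (A' : Arena) (others' : List Obj) (mem : Mem) : Prop where
  /-- AR7 since the entry -/
  ext : A.Extends A'
  /-- no temp block was allocated or released -/
  temps : A'.temps = A.temps
  /-- `temp_offset` is the entry's -/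
  T : A'.T = A.T
  /-- the arena layer now -/
  arena : ArenaOK A' others' mem f
  /-- the shadow layer now -/
  shadow : ShadowInv others' frames top mem
  /-- the live list only grew -/
  sub : ∀ o, o ∈ others → o ∈ others'
  /-- … by setup blocks -/
  sup : ∀ o, o ∈ others' → o ∈ others ∨ o ∈ A'.setupObjs
  /-- no live object in the image's text -/
  offText : ∀ o, o ∈ others' → L.textHi ≤ o.base
  /-- the arena lies above the text -/
  arenaText : L.textHi ≤ A.B

namespace Carry
variable {others : List Obj} {frames : List (Nat × FrameLayout)} {A A' : Arena} {top top' f : Nat} {others' : List Obj}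
  {mem mem' : Mem}

/-- At the entry: nothing allocated yet. -/
theorem start {u : State} (h : ArenaPre A others frames u) :
    Carry others frames A ((u.reg .rsp).toNat + 8) (u.reg .rdi).toNat A others u.mem :=
  ⟨Arena.Extends.refl A, rfl, rfl, h.arena, h.shadow.inv, fun _ ho => ho, fun _ ho => Or.inl ho, h.shadow.offText, h.offText⟩

/-- FRAME: a stretch of code that leaves `[f + 112, f + 136)` and the shadow alone keeps everything. -/
theorem frame (h : Carry others frames A top f A' others' mem) (hf : f + 1808 ≤ 2 ^ 64)
    (he : Mem.EqOn (f + 112) (f + 136) mem mem') (hun : ShadowUntouched mem mem') :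
    Carry others frames A top f A' others' mem' :=
  ⟨h.ext, h.temps, h.T, h.arena.frame hf he, h.shadow.untouched hun, h.sub, h.sup, h.offText, h.arenaText⟩

/-- The stack pointer goes down (the prologue). -/
theorem lower (h : Carry others frames A top f A' others' mem) (ht : top' ≤ top) (h8 : top' % 8 = 0) (hlo : 0x700000 ≤ top') :
    Carry others frames A top' f A' others' mem :=
  ⟨h.ext, h.temps, h.T, h.arena, h.shadow.lower ht h8 hlo, h.sub, h.sup, h.offText, h.arenaText⟩

/-- The stack pointer goes up again (the epilogue): no protected frame lies below the new `top`. -/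
theorem raise (h : Carry others frames A top f A' others' mem) (ht : top ≤ top') (h8 : top' % 8 = 0) (hhi : top' ≤ 0x800000)
    (hfr : ∀ bF, bF ∈ frames → top' ≤ bF.1) : Carry others frames A top' f A' others' mem :=
  ⟨h.ext, h.temps, h.T, h.arena, h.shadow.raise ht h8 hhi hfr, h.sub, h.sup, h.offText, h.arenaText⟩

/-- A live range of the entry's live list is one of the present list. -/
theorem liveIn (h : Carry others frames A top f A' others' mem) {a n : Nat} (hl : LiveIn others frames a n) :
    LiveIn others' frames a n := by
  refine hl.mono ?_
  intro o ho
  rcases List.mem_append.mp ho with h1 | h2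
  · exact List.mem_append_left _ h1
  · exact List.mem_append_right _ (h.sub o h2)

/-- **The precondition of the next allocator call.** -/
theorem arenaPre {s : State} (h : Carry others frames A top f A' others' s.mem)
    (hlive : LiveIn others frames f Off.sizeof.stb_vorbis)
    (hrdi : (s.reg .rdi).toNat = f) (hrsp : (s.reg .rsp).toNat + 8 = top) : ArenaPre A' others' frames s := by
  refine ⟨⟨?_, h.offText⟩, ?_, ?_, ?_⟩
  · rw [hrsp]
    exact h.shadow
  · rw [hrdi]
    exact ObjLive.of_liveIn (h.liveIn hlive)
  · rw [hrdi]
    exact h.arena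
  · rw [h.ext.B]
    exact h.arenaText

/-- **The shadow clause of the next unprotected callee.** -/
theorem shadowPre {s : State} (h : Carry others frames A top f A' others' s.mem)
    (hrsp : (s.reg .rsp).toNat + 8 = top) : ShadowPre others' frames s := by
  refine ⟨?_, h.offText⟩
  rw [hrsp]
  exact h.shadow

/-- A block allocated since the entry is one live object now. -/
theorem since_live (h : Carry others frames A top f A' others' mem) {B : Block} (hB : Since A A' B) :
    LiveIn others' frames B.base B.size :=
  liveIn_of_arenaBlk h.arena hB.blk

/-- **One `setup_malloc(f, n)`**: the carried facts after the call, and the result — NULL (then no shadow byte was written), or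
a block allocated since the entry, inside the free gap of the entry's arena. -/
theorem malloc {s r : State} (h : Carry others frames A top f A' others' s.mem)
    (hrdi : (s.reg .rdi).toNat = f) (hrsp : (s.reg .rsp).toNat + 8 = top) {n : Nat}
    (hn : (s.reg .rsi).toNat % 2 ^ 32 = n)
    (hpost : (setup_malloc.spec others' frames A').post s r) :
    ∃ (A'' : Arena) (others'' : List Obj), Carry others frames A top f A'' others'' r.mem ∧ A'.Extends A'' ∧
      ((r.reg .rax = 0 ∧ ShadowUntouched s.mem r.mem) ∨
       (A'.Fits n ∧ (r.reg .rax).toNat = A'.B + A'.S + 32 ∧ Since A A'' ⟨(r.reg .rax).toNat, n⟩ ∧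
        A.B + A.S + 32 ≤ (r.reg .rax).toNat ∧ (r.reg .rax).toNat + n ≤ A.B + A.T)) := by
  subst hn
  subst hrdi
  subst hrsp
  by_cases hfit : A'.Fits ((s.reg .rsi).toNat % 2 ^ 32)
  · obtain ⟨hrax, harena, hshad⟩ := hpost.1 hfit
    refine ⟨A'.pushSetup ((s.reg .rsi).toNat % 2 ^ 32), A'.newSetupObj ((s.reg .rsi).toNat % 2 ^ 32) :: others', ?_,
      A'.extends_pushSetup _, Or.inr ⟨hfit, hrax, ?_, ?_, ?_⟩⟩
    · refine ⟨h.ext.trans (A'.extends_pushSetup _), h.temps, h.T, harena, hshad, ?_, ?_, ?_, h.arenaText⟩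
      · intro o ho
        exact List.mem_cons_of_mem _ (h.sub o ho)
      · intro o ho
        have hset : (A'.pushSetup ((s.reg .rsi).toNat % 2 ^ 32)).setupObjs =
            A'.setupObjs ++ [A'.newSetupObj ((s.reg .rsi).toNat % 2 ^ 32)] := by
          unfold Arena.setupObjs
          rw [Arena.pushSetup_setups, List.map_append]
          rfl
        rw [hset]
        rcases List.mem_cons.mp ho with e | hold
        · right
          apply List.mem_append_right
          rw [e]
          exact List.mem_singleton.mpr rfl
        · rcases h.sup o hold with h1 | h2
          · exact Or.inl h1
          · right
            exact List.mem_append_left _ h2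
      · intro o ho
        rcases List.mem_cons.mp ho with e | hold
        · have := h.arenaText
          have hB := h.ext.B
          rw [e]
          unfold Arena.newSetupObj Arena.setupObj
          simp only
          omega
        · exact h.offText o hold
    · have hs := (h.arena.since_pushSetup ((s.reg .rsi).toNat % 2 ^ 32)).older h.ext
      rw [hrax, Nat.add_assoc]
      exact hs
    · have hB := h.ext.B
      have hS := h.ext.S
      omega
    · have hB := h.ext.B
      have hT := h.T
      have hr := le_r8 ((s.reg .rsi).toNat % 2 ^ 32)
      unfold Arena.Fits at hfit
      omega
  · obtain ⟨hrax, harena, hun, _⟩ := hpost.2 hfit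
    exact ⟨A', others', ⟨h.ext, h.temps, h.T, harena, h.shadow.untouched hun, h.sub, h.sup, h.offText, h.arenaText⟩,
      Arena.Extends.refl A', Or.inl ⟨hrax, hun⟩⟩

end Carry

/-- **Where `*f` lies relative to the free gap of the arena** `[B + S, B + T)` (where the new blocks will be): outside. `*f` is
inside ONE live object: a stack object (the arena is off the stack region, AR1x), a block of the arena (below `B + S` or from
`B + T` on), or an object outside the arena (AR6x). -/
theorem obj_off_gap {others : List Obj} {frames : List (Nat × FrameLayout)} {A : Arena} {top f fa : Nat} {mem : Mem}
    (hlive : LiveIn others frames f 1808) (ha : ArenaOK A others mem fa) (hsh : ShadowInv others frames top mem) :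
    f + 1808 ≤ A.B + A.S ∨ A.B + A.T ≤ f := by
  obtain ⟨o, ho, h1, h2⟩ := hlive
  have hb := ha.bounds
  have h1x := ha.AR1x
  rcases List.mem_append.mp ho with hs | hoth
  · obtain ⟨bF, hbF, g1, g2⟩ := ShadowInv.stackObj_gran hsh.stack hs
    obtain ⟨_, a8, atop, ahi, _⟩ := hsh.stack.active bF hbF
    have hlo := hsh.stack.lo
    have e1 : o.gLo = o.base / 8 := rfl
    have e2 : o.gHi = (o.base + o.size + 7) / 8 := rfl
    omega
  · rcases ha.AR6x o hoth with hin | ⟨_, _, hout⟩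
    · have hr := (ha.obj_range hin).2
      have hl := le_r8 o.size
      omega
    · omega

/-- **The footprint of a `setup_malloc` call inside a wider shadow window**: on success the new block lies inside the wider
range; on failure no shadow byte was written at all (the contract's window is the block that WOULD have been allocated). -/
theorem same_shadow {w0 w1 w2 : Span} {a b a' b' : Nat} {m m' : Mem}
    (h : Mem.SameExcept [w0, w1, w2, shadowSpan a b] m m')
    (hc : (a' ≤ a ∧ b ≤ b') ∨ (ShadowUntouched m m' ∧ b ≤ 0xFFFFF8)) :
    Mem.SameExcept [w0, w1, w2, shadowSpan a' b'] m m' := by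
  intro x hx
  have hx0 := hx w0 (by simp only [List.mem_cons, true_or])
  have hx1 := hx w1 (by simp only [List.mem_cons, true_or, or_true])
  have hx2 := hx w2 (by simp only [List.mem_cons, true_or, or_true])
  have hx3 := hx (shadowSpan a' b') (by simp only [List.mem_cons, true_or, or_true])
  unfold shadowSpan at hx3
  simp only at hx3
  rcases hc with ⟨k1, k2⟩ | ⟨hun, k⟩
  · apply h x
    intro w hw
    simp only [List.mem_cons, List.not_mem_nil, or_false] at hw
    rcases hw with rfl | rfl | rfl | rfl
    · exact hx0
    · exact hx1
    · exact hx2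
    · unfold shadowSpan
      simp only
      omega
  · by_cases hin : 0xC00000 ≤ x.toNat ∧ x.toNat < 0xE00000
    · exact hun x hin.1 hin.2
    · apply h x
      intro w hw
      simp only [List.mem_cons, List.not_mem_nil, or_false] at hw
      rcases hw with rfl | rfl | rfl | rfl
      · exact hx0
      · exact hx1
      · exact hx2
      · unfold shadowSpan
        simp only
        omega

/-- The bit-level form of a block size: the low half of edx is one of the eight numerals. -/
theorem ld_bv {x : BitVec 32} {n k : Nat} (hx : x.toNat = n) (h : Mdct.Ld n k) :
    x = 64#32 ∨ x = 128#32 ∨ x = 256#32 ∨ x = 512#32 ∨ x = 1024#32 ∨ x = 2048#32 ∨ x = 4096#32 ∨ x = 8192#32 := by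
  have hc := h.cases
  have e : ∀ m : Nat, m < 2 ^ 32 → x.toNat = m → x = BitVec.ofNat 32 m := by
    intro m hm hxm
    apply BitVec.eq_of_toNat_eq
    rw [hxm, BitVec.toNat_ofNat]
    omega
  rcases hc with ⟨_, rfl⟩ | ⟨_, rfl⟩ | ⟨_, rfl⟩ | ⟨_, rfl⟩ | ⟨_, rfl⟩ | ⟨_, rfl⟩ | ⟨_, rfl⟩ | ⟨_, rfl⟩
  · exact Or.inl (e 64 (by decide) hx)
  · exact Or.inr (Or.inl (e 128 (by decide) hx))
  · exact Or.inr (Or.inr (Or.inl (e 256 (by decide) hx)))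
  · exact Or.inr (Or.inr (Or.inr (Or.inl (e 512 (by decide) hx))))
  · exact Or.inr (Or.inr (Or.inr (Or.inr (Or.inl (e 1024 (by decide) hx)))))
  · exact Or.inr (Or.inr (Or.inr (Or.inr (Or.inr (Or.inl (e 2048 (by decide) hx))))))
  · exact Or.inr (Or.inr (Or.inr (Or.inr (Or.inr (Or.inr (Or.inl (e 4096 (by decide) hx)))))))
  · exact Or.inr (Or.inr (Or.inr (Or.inr (Or.inr (Or.inr (Or.inr (e 8192 (by decide) hx)))))))

/-- `shl eax, 2` of `n >> 1`: the size `sizeof(float) * n2 = 2 n` of `A[b]`, `B[b]`, `window[b]`. -/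
theorem size_n2 {x : BitVec 32} {n k : Nat} (hx : x.toNat = n) (h : Mdct.Ld n k) :
    (x.sshiftRight 1 <<< 2).toNat = 2 * n := by
  subst hx
  rcases ld_bv rfl h with rfl | rfl | rfl | rfl | rfl | rfl | rfl | rfl <;> decide

/-- `n >> 2`, as stored in the frame. -/
theorem size_n4 {x : BitVec 32} {n k : Nat} (hx : x.toNat = n) (h : Mdct.Ld n k) :
    (x.sshiftRight 2).toNat = n / 4 := by
  subst hx
  rcases ld_bv rfl h with rfl | rfl | rfl | rfl | rfl | rfl | rfl | rfl <;> decide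

/-- `n >> 3`, as stored in the frame. -/
theorem size_n8 {x : BitVec 32} {n k : Nat} (hx : x.toNat = n) (h : Mdct.Ld n k) :
    (x.sshiftRight 3).toNat = n / 8 := by
  subst hx
  rcases ld_bv rfl h with rfl | rfl | rfl | rfl | rfl | rfl | rfl | rfl <;> decide

/-- A saved-register slot read through an `EqOn` of the frame (the form the walker's `pop` looks for). -/
theorem slot64_of_eqOn {lo hi : Nat} {m m' : Mem} {a : Word} {x : Word} (he : Mem.EqOn lo hi m m')
    (h : UInt64.ofNat (m.readLE a 8) = x) (h1 : lo ≤ a.toNat) (h2 : a.toNat + 8 ≤ hi) (h3 : a.toNat + 8 < 2 ^ 64) :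
    UInt64.ofNat (m'.readLE a 8) = x := by
  rw [he.readLE a 8 h1 h2 h3]
  exact h

/-- A local of the frame read through an `EqOn` of the frame (the form the walker's load looks for). -/
theorem slot_of_eqOn {lo hi : Nat} {m m' : Mem} {a : Word} {k x : Nat} (he : Mem.EqOn lo hi m m')
    (h : m.readLE a k = x) (h1 : lo ≤ a.toNat) (h2 : a.toNat + k ≤ hi) (h3 : a.toNat + k < 2 ^ 64) :
    m'.readLE a k = x := by
  rw [he.readLE a k h1 h2 h3]
  exact h

/-- **Widening a footprint**: every window of the small list is empty or lies inside a window of the big list. (`u_same` on the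
contract's eleven windows makes `omega` split 2¹¹ cases per store; a stretch of code is first framed by the few windows it
touches, then widened, window by window, with the big window NAMED.) -/
theorem widenWins {ws ws' : List Span} {m m' : Mem} (h : Mem.SameExcept ws m m')
    (hs : ∀ w, w ∈ ws → w.hi ≤ w.lo ∨ ∃ w', w' ∈ ws' ∧ w'.lo ≤ w.lo ∧ w.hi ≤ w'.hi) : Mem.SameExcept ws' m m' := by
  refine h.mono ?_
  intro w hw a h1 h2
  rcases hs w hw with he | ⟨w', hw', k1, k2⟩
  · omega
  · exact ⟨w', hw', by omega, by omega⟩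

/-- Two different objects of a pairwise granule-disjoint list share no granule. -/
theorem pairwise_ne {l : List Obj} (h : l.Pairwise GranDisj) {a b : Obj} (ha : a ∈ l) (hb : b ∈ l) (hne : a ≠ b) :
    GranDisj a b := by
  induction l with
  | nil => cases ha
  | cons x xs ih =>
    rw [List.pairwise_cons] at h
    rcases List.mem_cons.mp ha with rfl | ha'
    · rcases List.mem_cons.mp hb with rfl | hb'
      · exact absurd rfl hne
      · exact h.1 b hb'
    · rcases List.mem_cons.mp hb with rfl | hb'
      · exact (h.1 a ha').symm
      · exact ih h.2 ha' hb'

/-- **`*f` does not meet the global `log2_4`**: both are (inside) live objects, different ones (`*f` needs 1808 bytes). -/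
theorem obj_off_log2 {others : List Obj} {frames : List (Nat × FrameLayout)} {top f : Nat} {mem : Mem}
    (hlive : LiveIn others frames f 1808) (hlog : Vorbis.Globals.log2_4.obj ∈ others)
    (hsh : ShadowInv others frames top mem) : f + 1808 ≤ 0x120640 ∨ 0x120650 ≤ f := by
  obtain ⟨o, ho, h1, h2⟩ := hlive
  have hl : Vorbis.Globals.log2_4.obj ∈ stackObjs frames ++ others := List.mem_append_right _ hlog
  have hne : o ≠ Vorbis.Globals.log2_4.obj := by
    intro e
    rw [e] at h1 h2
    have e1 : Vorbis.Globals.log2_4.obj.size = 16 := rfl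
    omega
  have hd := pairwise_ne hsh.shadow.disjoint ho hl hne
  have e1 : Vorbis.Globals.log2_4.obj.gLo = 0x120640 / 8 := rfl
  have e2 : Vorbis.Globals.log2_4.obj.gHi = (0x120640 + 16 + 7) / 8 := rfl
  have e3 : o.gLo = o.base / 8 := rfl
  have e4 : o.gHi = (o.base + o.size + 7) / 8 := rfl
  unfold GranDisj at hd
  omega

/-- **The arena does not contain the global `log2_4`** (AR6x: a live object that is no block lies outside the buffer). -/
theorem arena_off_log2 {others : List Obj} {A : Arena} {f : Nat} {mem : Mem} (ha : ArenaOK A others mem f)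
    (hlog : Vorbis.Globals.log2_4.obj ∈ others) : 0x120650 ≤ A.B ∨ A.B + A.L ≤ 0x120640 := by
  rcases ha.AR6x _ hlog with hin | ⟨_, _, hout⟩
  · have hr := (ha.obj_range hin).2
    have ek : Vorbis.Globals.log2_4.obj.kind = .global := rfl
    rcases hr with ⟨hk, _⟩ | ⟨hk, _⟩
    · rw [ek] at hk
      cases hk
    · rw [ek] at hk
      cases hk
  · have e1 : Vorbis.Globals.log2_4.obj.base = 0x120640 := rfl
    have e2 : Vorbis.Globals.log2_4.obj.size = 16 := rfl
    omega

/-- SH7 for `log2_4` follows the memory as long as its sixteen bytes read the same. -/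
theorem log2_frame {m m' : Mem} (h : Log2_4In m) (he : Mem.EqOn 0x120640 0x120650 m m') : Log2_4In m' := by
  intro i hi
  have hb : Vorbis.Globals.log2_4.beg = 0x120640 := rfl
  have e : (UInt64.ofNat (Vorbis.Globals.log2_4.beg + i)).toNat = 0x120640 + i := by
    rw [hb, UInt64.toNat_ofNat']
    omega
  rw [he.readLE _ 1 (by omega) (by omega) (by omega)]
  exact h i hi

/-! ### THE CUT-POINT ASSERTIONS (proposed split: one segment per call return, `L.init_blocksize.cut1` … `cut11`) -/

/-- **The result of one `setup_malloc(f, sz)` of this call**: NULL, or a block allocated since the entry (`Since A A'`), inside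
the free gap `[B + S + 32, B + T)` of the entry's arena. -/
def Res (A A' : Arena) (sz : Nat) (p : Word) : Prop :=
  p = 0 ∨ (Since A A' ⟨p.toNat, sz⟩ ∧ A.B + A.S + 32 ≤ p.toNat ∧ p.toNat + sz ≤ A.B + A.T)

/-- A result stays one when the arena grows further. -/
theorem Res.mono {A A' A'' : Arena} {sz : Nat} {p : Word} (h : Res A A' sz p) (he : A'.Extends A'') : Res A A'' sz p := by
  rcases h with h0 | ⟨hs, k1, k2⟩
  · exact Or.inl h0
  · exact Or.inr ⟨hs.mono he, k1, k2⟩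

/-- **What every cut-point assertion of init_blocksize shares.** `e` is the state at the function's first instruction (entered by
a `call`, with the contract's precondition), `v` the present state, `A'`, `others'` the ghost arena and live list of now. The
body's stack pointer is `e.rsp − 88` (six pushes, `sub rsp, 28H`); rbx = f, ebp = n, r12d = b; the frame holds the return address,
the six saved registers, `4·n2 = 2n` at `[rsp+4]`, `n4` at `[rsp+18H]`, `n8` at `[rsp+1CH]`; so far only the contract's footprint was
written; `Carry` carries the two layers (arena, shadow) for the present memory. -/
structure InBody (u₀ : State) (others : List Obj) (frames : List (Nat × FrameLayout)) (A : Arena) (k : Nat) (e : State)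
    (ret : Word) (A' : Arena) (others' : List Obj) (v : State) : Prop where
  /-- the function was entered by a call -/
  entry : AtEntry (conv u₀) L.init_blocksize.entry (init_blocksize.spec others frames A k).frame ret e
  /-- … with its precondition -/
  pre : (init_blocksize.spec others frames A k).pre e
  /-- the image's text is unchanged -/
  code : CodeOK u₀ v.mem
  /-- DF = 0, the SSE masks set -/
  inv : (conv u₀).inv v
  /-- the body's stack pointer -/
  rsp : v.reg .rsp = e.reg .rsp - 88
  /-- rbx = f -/
  rbx : v.reg .rbx = e.reg .rdi
  /-- ebp = n -/
  rbp : v.reg .rbp = Word.ofBV (Word.part .w32 (e.reg .rdx))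
  /-- r12d = b -/
  r12 : v.reg .r12 = Word.ofBV (Word.part .w32 (e.reg .rsi))
  /-- the return address -/
  s_ret : UInt64.ofNat (v.mem.readLE (e.reg .rsp) 8) = ret
  /-- the saved r15 -/
  s_r15 : UInt64.ofNat (v.mem.readLE (e.reg .rsp - 8) 8) = e.reg .r15
  /-- the saved r14 -/
  s_r14 : UInt64.ofNat (v.mem.readLE (e.reg .rsp - 16) 8) = e.reg .r14
  /-- the saved r13 -/
  s_r13 : UInt64.ofNat (v.mem.readLE (e.reg .rsp - 24) 8) = e.reg .r13
  /-- the saved r12 -/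
  s_r12 : UInt64.ofNat (v.mem.readLE (e.reg .rsp - 32) 8) = e.reg .r12
  /-- the saved rbp -/
  s_rbp : UInt64.ofNat (v.mem.readLE (e.reg .rsp - 40) 8) = e.reg .rbp
  /-- the saved rbx -/
  s_rbx : UInt64.ofNat (v.mem.readLE (e.reg .rsp - 48) 8) = e.reg .rbx
  /-- `[rsp+4]` = `sizeof(float) * n2` -/
  s_n2 : v.mem.readLE (e.reg .rsp - 84) 4 = 2 * ((e.reg .rdx).toNat % 2 ^ 32)
  /-- `[rsp+18H]` = `n4` -/
  s_n4 : v.mem.readLE (e.reg .rsp - 64) 4 = (e.reg .rdx).toNat % 2 ^ 32 / 4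
  /-- `[rsp+1CH]` = `n8` -/
  s_n8 : v.mem.readLE (e.reg .rsp - 60) 4 = (e.reg .rdx).toNat % 2 ^ 32 / 8
  /-- only the footprint was written -/
  same : Mem.SameExcept ((init_blocksize.spec others frames A k).footprint e) e.mem v.mem
  /-- the arena layer and the shadow layer now -/
  mid : Carry others frames A ((e.reg .rsp).toNat - 88) (e.reg .rdi).toNat A' others' v.mem

/-- **At `cut1` (0x10c1d8, after `setup_malloc(f, 2n)` for `A[b]`)**: rax is the result. -/
structure AtCut1 (u₀ : State) (others : List Obj) (frames : List (Nat × FrameLayout)) (A : Arena) (k : Nat) (e : State)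
    (ret : Word) (A' : Arena) (others' : List Obj) (v : State) : Prop where
  /-- the shared part -/
  body : InBody u₀ others frames A k e ret A' others' v
  /-- the cut point -/
  rip : v.rip = L.init_blocksize.cut1
  /-- rax = NULL or the new block of `2n` bytes -/
  res : Res A A' (2 * ((e.reg .rdx).toNat % 2 ^ 32)) (v.reg .rax)

/-- **At `cut2` (0x10c20b, after `setup_malloc(f, 2n)` for `B[b]`)**: `f->A[b]` is stored, its address is in `[rsp+10H]`,
r13 = (int64) b, r14 = b + 0xae, rax is the result. -/
structure AtCut2 (u₀ : State) (others : List Obj) (frames : List (Nat × FrameLayout)) (A : Arena) (k : Nat) (e : State)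
    (ret : Word) (A' : Arena) (others' : List Obj) (v : State) : Prop where
  /-- the shared part -/
  body : InBody u₀ others frames A k e ret A' others' v
  /-- the cut point -/
  rip : v.rip = L.init_blocksize.cut2
  /-- r13 = sext b -/
  r13 : v.reg .r13 = Word.ofBV (BitVec.signExtend 64 (Word.part .w32 (e.reg .rsi)))
  /-- r14 = sext b + 0xae -/
  r14 : v.reg .r14 = Word.ofBV (BitVec.signExtend 64 (Word.part .w32 (e.reg .rsi))) + 174
  /-- `[rsp+10H]` = `&f->A[b]` -/
  s_pa : v.mem.readLE (e.reg .rsp - 72) 8 =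
    (e.reg .rdi + Word.ofBV (BitVec.signExtend 64 (Word.part .w32 (e.reg .rsi))) * 8 + 1400).toNat
  /-- `f->A[b]` = NULL or the block of `2n` bytes -/
  ptrA : Res A A' (2 * ((e.reg .rdx).toNat % 2 ^ 32)) (UInt64.ofNat (v.mem.readLE
    (e.reg .rdi + (Word.ofBV (BitVec.signExtend 64 (Word.part .w32 (e.reg .rsi))) + 174) * 8 + 8) 8))
  /-- rax = NULL or the new block of `2n` bytes -/
  res : Res A A' (2 * ((e.reg .rdx).toNat % 2 ^ 32)) (v.reg .rax)

/-! ### THE FIRST TWO SEGMENTS OF THE PROPOSED SPLIT, PROVED (each about 70 s) -/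

set_option maxRecDepth 8000 in
set_option maxHeartbeats 64000000 in
/-- **Segment 1 of the proposed split** (entry 0x10c1a0 … `cut1` 0x10c1d8; lines 1314–1316): the prologue, `n2 n4 n8`, the call
`setup_malloc(f, 2n)` for `A[b]`. From the contract's precondition to the assertion `AtCut1`. -/
theorem seg1 {Lay : Layout} (hLay : Lay.hi = 0x1000000) {μ : Microarch} (hμ : UserX.MicroOK μ) {u₀ : State}
    (hcode : HasCodeNat Lay u₀ Vorbis.L.init_blocksize.entry Vorbis.Code.code_init_blocksize.nat Vorbis.L.init_blocksize.size)
    (h_sm : ∀ (others : List Obj) (frames : List (Nat × FrameLayout)) (A : Arena),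
      Calls Lay μ Vorbis.WayInv (Vorbis.conv u₀) Vorbis.L.setup_malloc.entry (Vorbis.Spec.setup_malloc.spec others frames A))
    (others : List Obj) (frames : List (Nat × FrameLayout)) (A : Arena) (k : Nat) (u : State) (ret : Word)
    (he : AtEntry (Vorbis.conv u₀) Vorbis.L.init_blocksize.entry (init_blocksize.spec others frames A k).frame ret u)
    (hpre : (init_blocksize.spec others frames A k).pre u) :
    ReachVia Lay μ Vorbis.WayInv u (fun v => ∃ (A' : Arena) (others' : List Obj), AtCut1 u₀ others frames A k u ret A' others' v) := by
  have he0 := he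
  have hpre0 := hpre
  v_entry he
  obtain ⟨hap, hlive, hb, hld, hlogobj, hlogin⟩ := hpre
  have hsh := hap.shadow
  have hsp := hsh.rsp
  rw [arg32_def] at hb hld
  -- the two `int` arguments, named
  generalize hbq : (u.reg .rsi).toNat % 2 ^ 32 = b at hb
  generalize hnq : (u.reg .rdx).toNat % 2 ^ 32 = n at hld
  -- where `*f` is; where the free gap of the arena is
  have hwhere := hlive.where_ hsh.inv hsh.offText (by decide)
  simp only [Vorbis.Off.sizeof.stb_vorbis] at hwhere hlive
  have hgap := obj_off_gap hlive hap.arena hsh.inv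
  have hbounds := hap.arena.bounds
  have h1x := hap.arena.AR1x
  have htext : 0x119d40 ≤ A.B := hap.offText
  have hflog := obj_off_log2 hlive hlogobj hsh.inv
  have halog := arena_off_log2 hap.arena hlogobj
  have hfrm : ∀ bF, bF ∈ frames → (u.reg .rsp).toNat + 8 ≤ bF.1 := fun bF hbF => (hsh.inv.stack.active bF hbF).2.2.1
  have hsx : (Word.ofBV (BitVec.signExtend 64 (Word.part .w32 (u.reg .rsi)))).toNat = b := by
    rw [← hbq, ← arg32_def]
    exact arg32_sext u .rsi (by rw [arg32_def]; omega)
  have hnv : (Word.part .w32 (u.reg .rdx)).toNat = n := by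
    rw [← hnq]
    exact Asan.part32_toNat _
  have hfacts := hld.isBlocksize.facts
  have hz2 := size_n2 hnv hld
  have hz4 := size_n4 hnv hld
  have hz8 := size_n8 hnv hld
  have hshlo : (shadowSpan (A.B + A.S) (A.B + A.T)).lo = 0xC00000 + (A.B + A.S) / 8 := rfl
  have hshhi : (shadowSpan (A.B + A.S) (A.B + A.T)).hi = 0xC00000 + (A.B + A.T + 7) / 8 := rfl
  -- the carried facts at the body's stack level
  have hM0 : Carry others frames A ((u.reg .rsp).toNat - 88) (u.reg .rdi).toNat A others u.mem :=
    (Carry.start hap).lower (by omega) (by omega) (by omega)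
  -- the contract's footprint, named, and its windows
  obtain ⟨FP, hFP⟩ : ∃ FP : List Span, FP =
      [⟨(u.reg .rsp).toNat - 256, (u.reg .rsp).toNat⟩, ⟨(u.reg .rdi).toNat + 8, (u.reg .rdi).toNat + 12⟩, ⟨(u.reg .rdi).toNat + 128, (u.reg .rdi).toNat + 132⟩, ⟨(u.reg .rdi).toNat + 140, (u.reg .rdi).toNat + 144⟩, ⟨(u.reg .rdi).toNat + 1400 + 8 * b, (u.reg .rdi).toNat + 1408 + 8 * b⟩, ⟨(u.reg .rdi).toNat + 1416 + 8 * b, (u.reg .rdi).toNat + 1424 + 8 * b⟩, ⟨(u.reg .rdi).toNat + 1432 + 8 * b, (u.reg .rdi).toNat + 1440 + 8 * b⟩, ⟨(u.reg .rdi).toNat + 1448 + 8 * b, (u.reg .rdi).toNat + 1456 + 8 * b⟩, ⟨(u.reg .rdi).toNat + 1464 + 8 * b, (u.reg .rdi).toNat + 1472 + 8 * b⟩,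
       ⟨A.B + A.S, A.B + A.T⟩, shadowSpan (A.B + A.S) (A.B + A.T)] := ⟨_, rfl⟩
  have m_st : (⟨(u.reg .rsp).toNat - 256, (u.reg .rsp).toNat⟩ : Span) ∈ FP := by rw [hFP]; simp only [List.mem_cons, true_or]
  have m_f8 : (⟨(u.reg .rdi).toNat + 8, (u.reg .rdi).toNat + 12⟩ : Span) ∈ FP := by rw [hFP]; simp only [List.mem_cons, true_or, or_true]
  have m_f128 : (⟨(u.reg .rdi).toNat + 128, (u.reg .rdi).toNat + 132⟩ : Span) ∈ FP := by rw [hFP]; simp only [List.mem_cons, true_or, or_true]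
  have m_f140 : (⟨(u.reg .rdi).toNat + 140, (u.reg .rdi).toNat + 144⟩ : Span) ∈ FP := by rw [hFP]; simp only [List.mem_cons, true_or, or_true]
  have m_A : (⟨(u.reg .rdi).toNat + 1400 + 8 * b, (u.reg .rdi).toNat + 1408 + 8 * b⟩ : Span) ∈ FP := by rw [hFP]; simp only [List.mem_cons, true_or, or_true]
  have m_B : (⟨(u.reg .rdi).toNat + 1416 + 8 * b, (u.reg .rdi).toNat + 1424 + 8 * b⟩ : Span) ∈ FP := by rw [hFP]; simp only [List.mem_cons, true_or, or_true]
  have m_C : (⟨(u.reg .rdi).toNat + 1432 + 8 * b, (u.reg .rdi).toNat + 1440 + 8 * b⟩ : Span) ∈ FP := by rw [hFP]; simp only [List.mem_cons, true_or, or_true]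
  have m_W : (⟨(u.reg .rdi).toNat + 1448 + 8 * b, (u.reg .rdi).toNat + 1456 + 8 * b⟩ : Span) ∈ FP := by rw [hFP]; simp only [List.mem_cons, true_or, or_true]
  have m_R : (⟨(u.reg .rdi).toNat + 1464 + 8 * b, (u.reg .rdi).toNat + 1472 + 8 * b⟩ : Span) ∈ FP := by rw [hFP]; simp only [List.mem_cons, true_or, or_true]
  have m_gap : (⟨A.B + A.S, A.B + A.T⟩ : Span) ∈ FP := by rw [hFP]; simp only [List.mem_cons, true_or, or_true]
  have m_sh : (shadowSpan (A.B + A.S) (A.B + A.T)) ∈ FP := by rw [hFP]; simp only [List.mem_cons, true_or, or_true]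
  have hsm0 := h_sm others frames A
  -- ── entry … call 1 (0x10c1d3): A[b] = setup_malloc(f, 2n), line 1316 ──────────────────────────────────────────────
  u_walk hcode [hμ.vendor] span [Vorbis.L.textLo, Vorbis.L.textHi] side (v_side)
  case call_inv => v_inv
  case pre_10c1d3 =>
    have hM : Carry others frames A ((u.reg .rsp).toNat - 88) (u.reg .rdi).toNat A others s_10c1d3.mem := by
      refine hM0.frame (by omega) ?_ ?_
      · u_memnorm
        u_eqon
      · v_untouched
    exact hM.arenaPre hlive (by rw [w_kept.get .rdi rfl]) (by rw [w_rsp]; u_omega)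
  clear w_has_10c1a0 w_has_10c1a2 w_has_10c1a4 w_has_10c1a6 w_has_10c1a8 w_has_10c1a9 w_has_10c1bf w_has_10c1c6 w_has_10c1cd w_has_10c1d3
  have hM : Carry others frames A ((u.reg .rsp).toNat - 88) (u.reg .rdi).toNat A others s_10c1d3.mem := by
    refine hM0.frame (by omega) ?_ ?_
    · u_memnorm
      u_eqon
    · v_untouched
  have c_rdi : s_10c1d3.reg .rdi = u.reg .rdi := w_kept_10c1d3.get .rdi rfl
  have c_rsi : (s_10c1d3.reg .rsi).toNat % 2 ^ 32 = 2 * n := by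
    rw [w_rsi_10c1d3, Vorbis.toNat_ofBV32, hz2]
    omega
  obtain ⟨A1, others1, hM1, hE1, hres1⟩ := hM.malloc (by rw [c_rdi]) (by rw [w_rsp_10c1d3]; u_omega) c_rsi w_post
  have w_eq := Vorbis.conv_code_eqOn w_code
  have w_df := (show X86.User.abiInv _ from w_inv).1
  have w_mx := (show X86.User.abiInv _ from w_inv).2
  have w_sse := Vorbis.sseOK_of_abiInv w_inv
  simp only [X86.User.Spec.footprint, vspec, w_rsp_10c1d3, c_rdi, c_rsi] at w_same
  replace w_same := same_shadow (a' := A.B + A.S) (b' := A.B + A.T) w_same (by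
    have hbd := hM.arena.bounds
    rcases hres1 with ⟨_, hun⟩ | ⟨_, hrax, _, k1, k2⟩
    · exact Or.inr ⟨hun, by omega⟩
    · exact Or.inl ⟨by omega, by omega⟩)
  -- the frame as it is at the first call: the six saved registers, the return address, n4, n8, 4·n2
  have F_ret : UInt64.ofNat (s_10c1d3.mem.readLE (u.reg .rsp) 8) = ret := by u_frame he_retAddr
  have F_r15 : UInt64.ofNat (s_10c1d3.mem.readLE (u.reg .rsp - 8) 8) = u.reg .r15 := by u_resolve
  have F_r14 : UInt64.ofNat (s_10c1d3.mem.readLE (u.reg .rsp - 16) 8) = u.reg .r14 := by u_resolve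
  have F_r13 : UInt64.ofNat (s_10c1d3.mem.readLE (u.reg .rsp - 24) 8) = u.reg .r13 := by u_resolve
  have F_r12 : UInt64.ofNat (s_10c1d3.mem.readLE (u.reg .rsp - 32) 8) = u.reg .r12 := by u_resolve
  have F_rbp : UInt64.ofNat (s_10c1d3.mem.readLE (u.reg .rsp - 40) 8) = u.reg .rbp := by u_resolve
  have F_rbx : UInt64.ofNat (s_10c1d3.mem.readLE (u.reg .rsp - 48) 8) = u.reg .rbx := by u_resolve
  have F_n2 : s_10c1d3.mem.readLE (u.reg .rsp - 84) 4 = 2 * n := by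
    rw [← hz2]
    u_read
  have F_n4 : s_10c1d3.mem.readLE (u.reg .rsp - 64) 4 = n / 4 := by
    rw [← hz4]
    u_read
  have F_n8 : s_10c1d3.mem.readLE (u.reg .rsp - 60) 4 = n / 8 := by
    rw [← hz8]
    u_read
  rw [w_mem_10c1d3] at w_same
  have hfr1 : Mem.EqOn ((u.reg .rsp).toNat - 64) ((u.reg .rsp).toNat + 8) s_10c1d3.mem s_10c1d3r.mem := by
    rw [w_mem_10c1d3]
    u_eqon
  have hfn1 : Mem.EqOn ((u.reg .rsp).toNat - 84) ((u.reg .rsp).toNat - 80) s_10c1d3.mem s_10c1d3r.mem := by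
    rw [w_mem_10c1d3]
    u_eqon
  have hn2 : s_10c1d3r.mem.readLE (u.reg .rsp - 84) 4 = 2 * n :=
    slot_of_eqOn hfn1 F_n2 (by u_omega) (by u_omega) (by u_omega)
  have hseg1 : Mem.SameExcept
      [⟨(u.reg .rsp).toNat - 256, (u.reg .rsp).toNat⟩,
       ⟨(u.reg .rdi).toNat + 8, (u.reg .rdi).toNat + 12⟩,
       ⟨(u.reg .rdi).toNat + 128, (u.reg .rdi).toNat + 132⟩,
       shadowSpan (A.B + A.S) (A.B + A.T)] u.mem s_10c1d3r.mem := by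
    u_same
  have hsame1 : Mem.SameExcept FP u.mem s_10c1d3r.mem := by
    refine widenWins hseg1 ?_
    intro w hw
    simp only [List.mem_cons, List.not_mem_nil, or_false] at hw
    rcases hw with rfl | rfl | rfl | rfl
    · exact Or.inr ⟨_, m_st, Nat.le_refl _, Nat.le_refl _⟩
    · exact Or.inr ⟨_, m_f8, Nat.le_refl _, Nat.le_refl _⟩
    · exact Or.inr ⟨_, m_f128, Nat.le_refl _, Nat.le_refl _⟩
    · exact Or.inr ⟨_, m_sh, Nat.le_refl _, Nat.le_refl _⟩
  -- the exit: `AtCut1` for the returned state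
  refine ReachVia.done ⟨A1, others1, ⟨⟨he0, hpre0, w_eq, w_inv, w_rsp, w_rbx, w_rbp, w_r12, ?_, ?_, ?_, ?_, ?_, ?_, ?_, ?_, ?_, ?_, ?_,
    hM1⟩, w_rip, ?_⟩⟩
  · exact slot64_of_eqOn hfr1 F_ret (by u_omega) (by u_omega) (by u_omega)
  · exact slot64_of_eqOn hfr1 F_r15 (by u_omega) (by u_omega) (by u_omega)
  · exact slot64_of_eqOn hfr1 F_r14 (by u_omega) (by u_omega) (by u_omega)
  · exact slot64_of_eqOn hfr1 F_r13 (by u_omega) (by u_omega) (by u_omega)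
  · exact slot64_of_eqOn hfr1 F_r12 (by u_omega) (by u_omega) (by u_omega)
  · exact slot64_of_eqOn hfr1 F_rbp (by u_omega) (by u_omega) (by u_omega)
  · exact slot64_of_eqOn hfr1 F_rbx (by u_omega) (by u_omega) (by u_omega)
  · rw [hnq]
    exact hn2
  · rw [hnq]
    exact slot_of_eqOn hfr1 F_n4 (by u_omega) (by u_omega) (by u_omega)
  · rw [hnq]
    exact slot_of_eqOn hfr1 F_n8 (by u_omega) (by u_omega) (by u_omega)
  · simp only [X86.User.Spec.footprint, vspec, hbq]
    rw [← hFP]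
    exact hsame1
  · rw [hnq]
    rcases hres1 with ⟨h0, _⟩ | ⟨_, _, hs, k1, k2⟩
    · exact Or.inl h0
    · exact Or.inr ⟨hs, k1, k2⟩

set_option maxRecDepth 8000 in
set_option maxHeartbeats 64000000 in
/-- **Segment 2 of the proposed split** (`cut1` 0x10c1d8 … `cut2` 0x10c20b; lines 1316–1317): the checked store `f->A[b] = rax`,
the call `setup_malloc(f, 2n)` for `B[b]`. From the assertion `AtCut1` to the assertion `AtCut2`: the step every later allocation repeats. -/
theorem seg2 {Lay : Layout} (hLay : Lay.hi = 0x1000000) {μ : Microarch} (hμ : UserX.MicroOK μ) {u₀ : State}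
    (hcode : HasCodeNat Lay u₀ Vorbis.L.init_blocksize.entry Vorbis.Code.code_init_blocksize.nat Vorbis.L.init_blocksize.size)
    (h_sm : ∀ (others : List Obj) (frames : List (Nat × FrameLayout)) (A : Arena),
      Calls Lay μ Vorbis.WayInv (Vorbis.conv u₀) Vorbis.L.setup_malloc.entry (Vorbis.Spec.setup_malloc.spec others frames A))
    (hstore8 : Asan.SmallCheck Lay μ Vorbis.WayInv (Vorbis.CodeOK u₀) [.rax, .rcx, .rdx] 8 Vorbis.L.__asan_store8_noabort.entry)
    (others : List Obj) (frames : List (Nat × FrameLayout)) (A : Arena) (k : Nat) (u : State) (ret : Word)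
    (A1 : Arena) (others1 : List Obj) (v : State) (hat : AtCut1 u₀ others frames A k u ret A1 others1 v) :
    ReachVia Lay μ Vorbis.WayInv v (fun w => ∃ (A' : Arena) (others' : List Obj), AtCut2 u₀ others frames A k u ret A' others' w) := by
  obtain ⟨hbody, hrip, hresA⟩ := hat
  have he := hbody.entry
  have hpre := hbody.pre
  have he0 := he
  have hpre0 := hpre
  v_entry he
  obtain ⟨hap, hlive, hb, hld, hlogobj, hlogin⟩ := hpre
  have hsh := hap.shadow
  have hsp := hsh.rsp
  rw [arg32_def] at hb hld
  -- the two `int` arguments, named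
  generalize hbq : (u.reg .rsi).toNat % 2 ^ 32 = b at hb
  generalize hnq : (u.reg .rdx).toNat % 2 ^ 32 = n at hld
  -- where `*f` is; where the free gap of the arena is
  have hwhere := hlive.where_ hsh.inv hsh.offText (by decide)
  simp only [Vorbis.Off.sizeof.stb_vorbis] at hwhere hlive
  have hgap := obj_off_gap hlive hap.arena hsh.inv
  have hbounds := hap.arena.bounds
  have h1x := hap.arena.AR1x
  have htext : 0x119d40 ≤ A.B := hap.offText
  have hflog := obj_off_log2 hlive hlogobj hsh.inv
  have halog := arena_off_log2 hap.arena hlogobj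
  have hfrm : ∀ bF, bF ∈ frames → (u.reg .rsp).toNat + 8 ≤ bF.1 := fun bF hbF => (hsh.inv.stack.active bF hbF).2.2.1
  have hsx : (Word.ofBV (BitVec.signExtend 64 (Word.part .w32 (u.reg .rsi)))).toNat = b := by
    rw [← hbq, ← arg32_def]
    exact arg32_sext u .rsi (by rw [arg32_def]; omega)
  have hnv : (Word.part .w32 (u.reg .rdx)).toNat = n := by
    rw [← hnq]
    exact Asan.part32_toNat _
  have hfacts := hld.isBlocksize.facts
  have hz2 := size_n2 hnv hld
  have hz4 := size_n4 hnv hld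
  have hz8 := size_n8 hnv hld
  have hshlo : (shadowSpan (A.B + A.S) (A.B + A.T)).lo = 0xC00000 + (A.B + A.S) / 8 := rfl
  have hshhi : (shadowSpan (A.B + A.S) (A.B + A.T)).hi = 0xC00000 + (A.B + A.T + 7) / 8 := rfl
  -- the contract's footprint, named, and its windows
  obtain ⟨FP, hFP⟩ : ∃ FP : List Span, FP =
      [⟨(u.reg .rsp).toNat - 256, (u.reg .rsp).toNat⟩, ⟨(u.reg .rdi).toNat + 8, (u.reg .rdi).toNat + 12⟩, ⟨(u.reg .rdi).toNat + 128, (u.reg .rdi).toNat + 132⟩, ⟨(u.reg .rdi).toNat + 140, (u.reg .rdi).toNat + 144⟩, ⟨(u.reg .rdi).toNat + 1400 + 8 * b, (u.reg .rdi).toNat + 1408 + 8 * b⟩, ⟨(u.reg .rdi).toNat + 1416 + 8 * b, (u.reg .rdi).toNat + 1424 + 8 * b⟩, ⟨(u.reg .rdi).toNat + 1432 + 8 * b, (u.reg .rdi).toNat + 1440 + 8 * b⟩, ⟨(u.reg .rdi).toNat + 1448 + 8 * b, (u.reg .rdi).toNat + 1456 + 8 * b⟩, ⟨(u.reg .rdi).toNat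 + 1464 + 8 * b, (u.reg .rdi).toNat + 1472 + 8 * b⟩,
       ⟨A.B + A.S, A.B + A.T⟩, shadowSpan (A.B + A.S) (A.B + A.T)] := ⟨_, rfl⟩
  have m_st : (⟨(u.reg .rsp).toNat - 256, (u.reg .rsp).toNat⟩ : Span) ∈ FP := by rw [hFP]; simp only [List.mem_cons, true_or]
  have m_f8 : (⟨(u.reg .rdi).toNat + 8, (u.reg .rdi).toNat + 12⟩ : Span) ∈ FP := by rw [hFP]; simp only [List.mem_cons, true_or, or_true]
  have m_f128 : (⟨(u.reg .rdi).toNat + 128, (u.reg .rdi).toNat + 132⟩ : Span) ∈ FP := by rw [hFP]; simp only [List.mem_cons, true_or, or_true]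
  have m_f140 : (⟨(u.reg .rdi).toNat + 140, (u.reg .rdi).toNat + 144⟩ : Span) ∈ FP := by rw [hFP]; simp only [List.mem_cons, true_or, or_true]
  have m_A : (⟨(u.reg .rdi).toNat + 1400 + 8 * b, (u.reg .rdi).toNat + 1408 + 8 * b⟩ : Span) ∈ FP := by rw [hFP]; simp only [List.mem_cons, true_or, or_true]
  have m_B : (⟨(u.reg .rdi).toNat + 1416 + 8 * b, (u.reg .rdi).toNat + 1424 + 8 * b⟩ : Span) ∈ FP := by rw [hFP]; simp only [List.mem_cons, true_or, or_true]
  have m_C : (⟨(u.reg .rdi).toNat + 1432 + 8 * b, (u.reg .rdi).toNat + 1440 + 8 * b⟩ : Span) ∈ FP := by rw [hFP]; simp only [List.mem_cons, true_or, or_true]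
  have m_W : (⟨(u.reg .rdi).toNat + 1448 + 8 * b, (u.reg .rdi).toNat + 1456 + 8 * b⟩ : Span) ∈ FP := by rw [hFP]; simp only [List.mem_cons, true_or, or_true]
  have m_R : (⟨(u.reg .rdi).toNat + 1464 + 8 * b, (u.reg .rdi).toNat + 1472 + 8 * b⟩ : Span) ∈ FP := by rw [hFP]; simp only [List.mem_cons, true_or, or_true]
  have m_gap : (⟨A.B + A.S, A.B + A.T⟩ : Span) ∈ FP := by rw [hFP]; simp only [List.mem_cons, true_or, or_true]
  have m_sh : (shadowSpan (A.B + A.S) (A.B + A.T)) ∈ FP := by rw [hFP]; simp only [List.mem_cons, true_or, or_true]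
  -- the present state under the walker's names
  have hM1 := hbody.mid
  have c_rip : v.rip = Vorbis.L.init_blocksize.cut1 := hrip
  have c_rsp := hbody.rsp
  have c_rbx := hbody.rbx
  have c_rbp := hbody.rbp
  have c_r12 := hbody.r12
  have w_eq : Mem.EqOn Vorbis.L.textLo Vorbis.L.textHi u₀.mem v.mem := hbody.code
  have hdf : v.flags .df = false := (show abiInv _ from hbody.inv).1
  have hmx : v.mxcsr &&& 0x1F80 = 0x1F80 := (show abiInv _ from hbody.inv).2
  have hsse := Vorbis.sseOK_of_abiInv hbody.inv
  have hn2 := hbody.s_n2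
  rw [hnq] at hn2 hresA
  have hsame1 := hbody.same
  simp only [X86.User.Spec.footprint, vspec, hbq] at hsame1
  rw [← hFP] at hsame1
  obtain ⟨pA, c_rax⟩ : ∃ z, v.reg .rax = z := ⟨_, rfl⟩
  rw [c_rax] at hresA
  have hsm1 := h_sm others1 frames A1
  -- ── … check + store `f->A[b]`, call 2 (0x10c206): B[b] = setup_malloc(f, 2n), line 1317 ───────────────────────────
  u_walk hcode [hμ.vendor] span [Vorbis.L.textLo, Vorbis.L.textHi] side (v_side)
  case check_10c1f5 =>
    have hun : ShadowUntouched v.mem s_10c1f5.mem := by v_untouched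
    exact (hM1.liveIn hlive).accSmall hM1.shadow hun _ 8 (by decide) (by u_omega) (by u_omega)
  case call_inv => v_inv
  case pre_10c206 =>
    have hM : Carry others frames A ((u.reg .rsp).toNat - 88) (u.reg .rdi).toNat A1 others1 s_10c206.mem := by
      refine hM1.frame (by omega) ?_ ?_
      · u_memnorm
        u_eqon
      · v_untouched
    exact hM.arenaPre hlive (by rw [w_rdi]) (by rw [w_rsp]; u_omega)
  have hM : Carry others frames A ((u.reg .rsp).toNat - 88) (u.reg .rdi).toNat A1 others1 s_10c206.mem := by
    refine hM1.frame (by omega) ?_ ?_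
    · u_memnorm
      u_eqon
    · v_untouched
  have c_rdi2 : s_10c206.reg .rdi = u.reg .rdi := w_rdi_10c206
  have c_rsi2 : (s_10c206.reg .rsi).toNat % 2 ^ 32 = 2 * n := by
    rw [w_rsi_10c206, Vorbis.toNat_ofBV32, BitVec.toNat_ofNat]
    omega
  obtain ⟨A2, others2, hM2, hE2, hres2⟩ := hM.malloc (by rw [c_rdi2]) (by rw [w_rsp_10c206]; u_omega) c_rsi2 w_post
  have w_eq := Vorbis.conv_code_eqOn w_code
  have w_df := (show X86.User.abiInv _ from w_inv).1
  have w_mx := (show X86.User.abiInv _ from w_inv).2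
  have w_sse := Vorbis.sseOK_of_abiInv w_inv
  simp only [X86.User.Spec.footprint, vspec, w_rsp_10c206, c_rdi2, c_rsi2] at w_same
  replace w_same := same_shadow (a' := A.B + A.S) (b' := A.B + A.T) w_same (by
    have hbd := hM.arena.bounds
    have hB1 := hM.ext.B
    have hS1 := hM.ext.S
    rcases hres2 with ⟨_, hun⟩ | ⟨_, hrax, _, k1, k2⟩
    · exact Or.inr ⟨hun, by omega⟩
    · exact Or.inl ⟨by omega, by omega⟩)
  -- the slot of `&f->A[b]` and the pointer `f->A[b]` as they are at the second call
  have G_pa : s_10c206.mem.readLE (u.reg .rsp - 72) 8 =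
      (u.reg .rdi + Word.ofBV (BitVec.signExtend 64 (Word.part .w32 (u.reg .rsi))) * 8 + 1400).toNat := by
    u_read
  have G_A : UInt64.ofNat (s_10c206.mem.readLE
      (u.reg .rdi + (Word.ofBV (BitVec.signExtend 64 (Word.part .w32 (u.reg .rsi))) + 174) * 8 + 8) 8) = pA := by
    u_resolve
  rw [w_mem_10c206] at w_same
  have hfr2 : Mem.EqOn ((u.reg .rsp).toNat - 64) ((u.reg .rsp).toNat + 8) v.mem s_10c206r.mem :=
    by u_eqon
  have hfn2 : Mem.EqOn ((u.reg .rsp).toNat - 84) ((u.reg .rsp).toNat - 80) v.mem s_10c206r.mem :=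
    by u_eqon
  have hpa2 : Mem.EqOn ((u.reg .rsp).toNat - 72) ((u.reg .rsp).toNat - 64) s_10c206.mem s_10c206r.mem := by
    rw [w_mem_10c206]
    u_eqon
  have hA2 : Mem.EqOn ((u.reg .rdi).toNat + 1400 + 8 * b) ((u.reg .rdi).toNat + 1408 + 8 * b) s_10c206.mem s_10c206r.mem := by
    rw [w_mem_10c206]
    u_eqon
  have hseg2 : Mem.SameExcept
      [⟨(u.reg .rsp).toNat - 256, (u.reg .rsp).toNat⟩,
       ⟨(u.reg .rdi).toNat + 8, (u.reg .rdi).toNat + 12⟩,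
       ⟨(u.reg .rdi).toNat + 128, (u.reg .rdi).toNat + 132⟩,
       shadowSpan (A.B + A.S) (A.B + A.T),
       ⟨(u.reg .rdi).toNat + 1400 + 8 * b, (u.reg .rdi).toNat + 1408 + 8 * b⟩] v.mem s_10c206r.mem := by
    u_same
  have hsame2 : Mem.SameExcept FP u.mem s_10c206r.mem := by
    refine hsame1.trans (widenWins hseg2 ?_)
    intro w hw
    simp only [List.mem_cons, List.not_mem_nil, or_false] at hw
    rcases hw with rfl | rfl | rfl | rfl | rfl
    · exact Or.inr ⟨_, m_st, Nat.le_refl _, Nat.le_refl _⟩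
    · exact Or.inr ⟨_, m_f8, Nat.le_refl _, Nat.le_refl _⟩
    · exact Or.inr ⟨_, m_f128, Nat.le_refl _, Nat.le_refl _⟩
    · exact Or.inr ⟨_, m_sh, Nat.le_refl _, Nat.le_refl _⟩
    · exact Or.inr ⟨_, m_A, Nat.le_refl _, Nat.le_refl _⟩
  -- the exit: `AtCut2` for the returned state
  refine ReachVia.done ⟨A2, others2, ⟨⟨he0, hpre0, w_eq, w_inv, w_rsp, (w_kept .rbx rfl).trans c_rbx, (w_kept .rbp rfl).trans c_rbp, (w_kept .r12 rfl).trans c_r12,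
    ?_, ?_, ?_, ?_, ?_, ?_, ?_, ?_, ?_, ?_, ?_, hM2⟩, w_rip, w_r13, w_r14, ?_, ?_, ?_⟩⟩
  · exact slot64_of_eqOn hfr2 hbody.s_ret (by u_omega) (by u_omega) (by u_omega)
  · exact slot64_of_eqOn hfr2 hbody.s_r15 (by u_omega) (by u_omega) (by u_omega)
  · exact slot64_of_eqOn hfr2 hbody.s_r14 (by u_omega) (by u_omega) (by u_omega)
  · exact slot64_of_eqOn hfr2 hbody.s_r13 (by u_omega) (by u_omega) (by u_omega)
  · exact slot64_of_eqOn hfr2 hbody.s_r12 (by u_omega) (by u_omega) (by u_omega)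
  · exact slot64_of_eqOn hfr2 hbody.s_rbp (by u_omega) (by u_omega) (by u_omega)
  · exact slot64_of_eqOn hfr2 hbody.s_rbx (by u_omega) (by u_omega) (by u_omega)
  · exact slot_of_eqOn hfn2 hbody.s_n2 (by u_omega) (by u_omega) (by u_omega)
  · exact slot_of_eqOn hfr2 hbody.s_n4 (by u_omega) (by u_omega) (by u_omega)
  · exact slot_of_eqOn hfr2 hbody.s_n8 (by u_omega) (by u_omega) (by u_omega)
  · simp only [X86.User.Spec.footprint, vspec, hbq]
    rw [← hFP]
    exact hsame2
  · exact slot_of_eqOn hpa2 G_pa (by u_omega) (by u_omega) (by u_omega)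
  · rw [hnq]
    have hA : UInt64.ofNat (s_10c206r.mem.readLE
        (u.reg .rdi + (Word.ofBV (BitVec.signExtend 64 (Word.part .w32 (u.reg .rsi))) + 174) * 8 + 8) 8) = pA :=
      slot64_of_eqOn hA2 G_A (by u_omega) (by u_omega) (by u_omega)
    rw [hA]
    exact hresA.mono hE2
  · rw [hnq]
    rcases hres2 with ⟨h0, _⟩ | ⟨_, _, hs, k1, k2⟩
    · exact Or.inl h0
    · exact Or.inr ⟨hs, k1, k2⟩

/-! ### Segment 3, the epilogue (`cut9` → `ret`: the contract's post), `cut8` → `cut9`, the error returns -/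

/-- **At `cut3` (0x10c241, after `setup_malloc(f, n)` for `C[b]`)**: `f->A[b]`, `f->B[b]` are stored, r13 = (int64) b,
r14 = b + 0xae (the re-load of `A[b]` at 0x10c271 uses it), rax is the result. -/
structure AtCut3 (u₀ : State) (others : List Obj) (frames : List (Nat × FrameLayout)) (A : Arena) (k : Nat) (e : State)
    (ret : Word) (A' : Arena) (others' : List Obj) (v : State) : Prop where
  /-- the shared part -/
  body : InBody u₀ others frames A k e ret A' others' v
  /-- the cut point -/
  rip : v.rip = L.init_blocksize.cut3
  /-- r13 = sext b -/
  r13 : v.reg .r13 = Word.ofBV (BitVec.signExtend 64 (Word.part .w32 (e.reg .rsi)))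
  /-- r14 = sext b + 0xae -/
  r14 : v.reg .r14 = Word.ofBV (BitVec.signExtend 64 (Word.part .w32 (e.reg .rsi))) + 174
  /-- `[rsp+10H]` = `&f->A[b]` -/
  s_pa : v.mem.readLE (e.reg .rsp - 72) 8 =
    (e.reg .rdi + Word.ofBV (BitVec.signExtend 64 (Word.part .w32 (e.reg .rsi))) * 8 + 1400).toNat
  /-- `f->A[b]` = NULL or the block of `2n` bytes -/
  ptrA : Res A A' (2 * ((e.reg .rdx).toNat % 2 ^ 32)) (UInt64.ofNat (v.mem.readLE
    (e.reg .rdi + (Word.ofBV (BitVec.signExtend 64 (Word.part .w32 (e.reg .rsi))) + 174) * 8 + 8) 8))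
  /-- `f->B[b]` = NULL or the block of `2n` bytes -/
  ptrB : Res A A' (2 * ((e.reg .rdx).toNat % 2 ^ 32)) (UInt64.ofNat (v.mem.readLE
    (e.reg .rdi + (Word.ofBV (BitVec.signExtend 64 (Word.part .w32 (e.reg .rsi))) + 176) * 8 + 8) 8))
  /-- rax = NULL or the new block of `n` bytes -/
  res : Res A A' ((e.reg .rdx).toNat % 2 ^ 32) (v.reg .rax)

/-- `lea esi, [rcx*4]` of `n4` loaded from the frame: the size `sizeof(float) * n4 = n` of `C[b]`. -/
theorem lea_n4 {n : Nat} (h1 : n % 64 = 0) (h2 : n ≤ 8192) :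
    (Word.ofBV (BitVec.setWidth 32 (Word.ofBV (BitVec.ofNat 32 (n / 4)) * 4).toBitVec)).toNat % 2 ^ 32 = n := by
  have e4 : (4 : Word).toNat = 4 := rfl
  rw [Vorbis.toNat_ofBV32, BitVec.toNat_setWidth, UInt64.toNat_toBitVec, UInt64.toNat_mul, Vorbis.toNat_ofBV32,
    BitVec.toNat_ofNat, e4]
  simp only [Nat.reducePow]
  omega

set_option maxRecDepth 8000 in
set_option maxHeartbeats 64000000 in
/-- **Segment 3 of the proposed split** (`cut2` 0x10c20b … `cut3` 0x10c241; lines 1317–1318): the checked store `f->B[b] = rax`,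
the call `setup_malloc(f, 4·n4)` for `C[b]`. From `AtCut2` to `AtCut3`. -/
theorem seg3 {Lay : Layout} (hLay : Lay.hi = 0x1000000) {μ : Microarch} (hμ : UserX.MicroOK μ) {u₀ : State}
    (hcode : HasCodeNat Lay u₀ Vorbis.L.init_blocksize.entry Vorbis.Code.code_init_blocksize.nat Vorbis.L.init_blocksize.size)
    (h_sm : ∀ (others : List Obj) (frames : List (Nat × FrameLayout)) (A : Arena),
      Calls Lay μ Vorbis.WayInv (Vorbis.conv u₀) Vorbis.L.setup_malloc.entry (Vorbis.Spec.setup_malloc.spec others frames A))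
    (hstore8 : Asan.SmallCheck Lay μ Vorbis.WayInv (Vorbis.CodeOK u₀) [.rax, .rcx, .rdx] 8 Vorbis.L.__asan_store8_noabort.entry)
    (others : List Obj) (frames : List (Nat × FrameLayout)) (A : Arena) (k : Nat) (u : State) (ret : Word)
    (A2 : Arena) (others2 : List Obj) (v : State) (hat : AtCut2 u₀ others frames A k u ret A2 others2 v) :
    ReachVia Lay μ Vorbis.WayInv v (fun w => ∃ (A' : Arena) (others' : List Obj), AtCut3 u₀ others frames A k u ret A' others' w) := by
  obtain ⟨hbody, hrip, hr13, hr14, hspa, hptrA, hresB⟩ := hat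
  have he := hbody.entry
  have hpre := hbody.pre
  have he0 := he
  have hpre0 := hpre
  v_entry he
  obtain ⟨hap, hlive, hb, hld, hlogobj, hlogin⟩ := hpre
  have hsh := hap.shadow
  have hsp := hsh.rsp
  rw [arg32_def] at hb hld
  -- the two `int` arguments, named
  generalize hbq : (u.reg .rsi).toNat % 2 ^ 32 = b at hb
  generalize hnq : (u.reg .rdx).toNat % 2 ^ 32 = n at hld
  -- where `*f` is; where the free gap of the arena is
  have hwhere := hlive.where_ hsh.inv hsh.offText (by decide)
  simp only [Vorbis.Off.sizeof.stb_vorbis] at hwhere hlive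
  have hgap := obj_off_gap hlive hap.arena hsh.inv
  have hbounds := hap.arena.bounds
  have h1x := hap.arena.AR1x
  have htext : 0x119d40 ≤ A.B := hap.offText
  have hflog := obj_off_log2 hlive hlogobj hsh.inv
  have halog := arena_off_log2 hap.arena hlogobj
  have hfrm : ∀ bF, bF ∈ frames → (u.reg .rsp).toNat + 8 ≤ bF.1 := fun bF hbF => (hsh.inv.stack.active bF hbF).2.2.1
  have hsx : (Word.ofBV (BitVec.signExtend 64 (Word.part .w32 (u.reg .rsi)))).toNat = b := by
    rw [← hbq, ← arg32_def]
    exact arg32_sext u .rsi (by rw [arg32_def]; omega)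
  have hnv : (Word.part .w32 (u.reg .rdx)).toNat = n := by
    rw [← hnq]
    exact Asan.part32_toNat _
  have hfacts := hld.isBlocksize.facts
  have hz2 := size_n2 hnv hld
  have hz4 := size_n4 hnv hld
  have hz8 := size_n8 hnv hld
  have hshlo : (shadowSpan (A.B + A.S) (A.B + A.T)).lo = 0xC00000 + (A.B + A.S) / 8 := rfl
  have hshhi : (shadowSpan (A.B + A.S) (A.B + A.T)).hi = 0xC00000 + (A.B + A.T + 7) / 8 := rfl
  -- the contract's footprint, named, and its windows
  obtain ⟨FP, hFP⟩ : ∃ FP : List Span, FP =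
      [⟨(u.reg .rsp).toNat - 256, (u.reg .rsp).toNat⟩, ⟨(u.reg .rdi).toNat + 8, (u.reg .rdi).toNat + 12⟩, ⟨(u.reg .rdi).toNat + 128, (u.reg .rdi).toNat + 132⟩, ⟨(u.reg .rdi).toNat + 140, (u.reg .rdi).toNat + 144⟩, ⟨(u.reg .rdi).toNat + 1400 + 8 * b, (u.reg .rdi).toNat + 1408 + 8 * b⟩, ⟨(u.reg .rdi).toNat + 1416 + 8 * b, (u.reg .rdi).toNat + 1424 + 8 * b⟩, ⟨(u.reg .rdi).toNat + 1432 + 8 * b, (u.reg .rdi).toNat + 1440 + 8 * b⟩, ⟨(u.reg .rdi).toNat + 1448 + 8 * b, (u.reg .rdi).toNat + 1456 + 8 * b⟩, ⟨(u.reg .rdi).toNat + 1464 + 8 * b, (u.reg .rdi).toNat + 1472 + 8 * b⟩,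
       ⟨A.B + A.S, A.B + A.T⟩, shadowSpan (A.B + A.S) (A.B + A.T)] := ⟨_, rfl⟩
  have m_st : (⟨(u.reg .rsp).toNat - 256, (u.reg .rsp).toNat⟩ : Span) ∈ FP := by rw [hFP]; simp only [List.mem_cons, true_or]
  have m_f8 : (⟨(u.reg .rdi).toNat + 8, (u.reg .rdi).toNat + 12⟩ : Span) ∈ FP := by rw [hFP]; simp only [List.mem_cons, true_or, or_true]
  have m_f128 : (⟨(u.reg .rdi).toNat + 128, (u.reg .rdi).toNat + 132⟩ : Span) ∈ FP := by rw [hFP]; simp only [List.mem_cons, true_or, or_true]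
  have m_f140 : (⟨(u.reg .rdi).toNat + 140, (u.reg .rdi).toNat + 144⟩ : Span) ∈ FP := by rw [hFP]; simp only [List.mem_cons, true_or, or_true]
  have m_A : (⟨(u.reg .rdi).toNat + 1400 + 8 * b, (u.reg .rdi).toNat + 1408 + 8 * b⟩ : Span) ∈ FP := by rw [hFP]; simp only [List.mem_cons, true_or, or_true]
  have m_B : (⟨(u.reg .rdi).toNat + 1416 + 8 * b, (u.reg .rdi).toNat + 1424 + 8 * b⟩ : Span) ∈ FP := by rw [hFP]; simp only [List.mem_cons, true_or, or_true]
  have m_C : (⟨(u.reg .rdi).toNat + 1432 + 8 * b, (u.reg .rdi).toNat + 1440 + 8 * b⟩ : Span) ∈ FP := by rw [hFP]; simp only [List.mem_cons, true_or, or_true]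
  have m_W : (⟨(u.reg .rdi).toNat + 1448 + 8 * b, (u.reg .rdi).toNat + 1456 + 8 * b⟩ : Span) ∈ FP := by rw [hFP]; simp only [List.mem_cons, true_or, or_true]
  have m_R : (⟨(u.reg .rdi).toNat + 1464 + 8 * b, (u.reg .rdi).toNat + 1472 + 8 * b⟩ : Span) ∈ FP := by rw [hFP]; simp only [List.mem_cons, true_or, or_true]
  have m_gap : (⟨A.B + A.S, A.B + A.T⟩ : Span) ∈ FP := by rw [hFP]; simp only [List.mem_cons, true_or, or_true]
  have m_sh : (shadowSpan (A.B + A.S) (A.B + A.T)) ∈ FP := by rw [hFP]; simp only [List.mem_cons, true_or, or_true]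
  -- the present state: the walker reads these by type
  have hM2 := hbody.mid
  have c_rip : v.rip = Vorbis.L.init_blocksize.cut2 := hrip
  have c_rsp := hbody.rsp
  have c_rbx := hbody.rbx
  have c_rbp := hbody.rbp
  have c_r12 := hbody.r12
  have c_r13 := hr13
  have c_r14 := hr14
  have w_eq : Mem.EqOn Vorbis.L.textLo Vorbis.L.textHi u₀.mem v.mem := hbody.code
  have hdf : v.flags .df = false := (show abiInv _ from hbody.inv).1
  have hmx : v.mxcsr &&& 0x1F80 = 0x1F80 := (show abiInv _ from hbody.inv).2
  have hsse := Vorbis.sseOK_of_abiInv hbody.inv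
  have hn4 := hbody.s_n4
  rw [hnq] at hn4 hresB hptrA
  have hsame2 := hbody.same
  simp only [X86.User.Spec.footprint, vspec, hbq] at hsame2
  rw [← hFP] at hsame2
  obtain ⟨pB, c_rax⟩ : ∃ z, v.reg .rax = z := ⟨_, rfl⟩
  rw [c_rax] at hresB
  have hsm2 := h_sm others2 frames A2
  -- ── check + store `f->B[b]`, call 3 (0x10c23c): C[b] = setup_malloc(f, 4·n4), line 1318 ──────────────────────────
  u_walk hcode [hμ.vendor] span [Vorbis.L.textLo, Vorbis.L.textHi] side (v_side)
  case check_10c21f =>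
    have hun : ShadowUntouched v.mem s_10c21f.mem := by v_untouched
    exact (hM2.liveIn hlive).accSmall hM2.shadow hun _ 8 (by decide) (by u_omega) (by u_omega)
  case call_inv => v_inv
  case pre_10c23c =>
    have hM : Carry others frames A ((u.reg .rsp).toNat - 88) (u.reg .rdi).toNat A2 others2 s_10c23c.mem := by
      refine hM2.frame (by omega) ?_ ?_
      · u_memnorm
        u_eqon
      · v_untouched
    exact hM.arenaPre hlive (by rw [w_rdi]) (by rw [w_rsp]; u_omega)
  have hM : Carry others frames A ((u.reg .rsp).toNat - 88) (u.reg .rdi).toNat A2 others2 s_10c23c.mem := by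
    refine hM2.frame (by omega) ?_ ?_
    · u_memnorm
      u_eqon
    · v_untouched
  have c_rdi3 : s_10c23c.reg .rdi = u.reg .rdi := w_rdi_10c23c
  have c_rsi3 : (s_10c23c.reg .rsi).toNat % 2 ^ 32 = n := by
    rw [w_rsi_10c23c]
    exact lea_n4 hfacts.1 hfacts.2.2
  obtain ⟨A3, others3, hM3, hE3, hres3⟩ := hM.malloc (by rw [c_rdi3]) (by rw [w_rsp_10c23c]; u_omega) c_rsi3 w_post
  have w_eq := Vorbis.conv_code_eqOn w_code
  simp only [X86.User.Spec.footprint, vspec, w_rsp_10c23c, c_rdi3, c_rsi3] at w_same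
  replace w_same := same_shadow (a' := A.B + A.S) (b' := A.B + A.T) w_same (by
    have hbd := hM.arena.bounds
    have hB1 := hM.ext.B
    have hS1 := hM.ext.S
    rcases hres3 with ⟨_, hun⟩ | ⟨_, hrax, _, k1, k2⟩
    · exact Or.inr ⟨hun, by omega⟩
    · exact Or.inl ⟨by omega, by omega⟩)
  -- the pointer `f->B[b]` as it is at the third call
  have G_B : UInt64.ofNat (s_10c23c.mem.readLE
      (u.reg .rdi + (Word.ofBV (BitVec.signExtend 64 (Word.part .w32 (u.reg .rsi))) + 176) * 8 + 8) 8) = pB := by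
    u_resolve
  rw [w_mem_10c23c] at w_same
  have hfr3 : Mem.EqOn ((u.reg .rsp).toNat - 72) ((u.reg .rsp).toNat + 8) v.mem s_10c23cr.mem := by
    u_eqon
  have hfn3 : Mem.EqOn ((u.reg .rsp).toNat - 84) ((u.reg .rsp).toNat - 80) v.mem s_10c23cr.mem := by
    u_eqon
  have hA3 : Mem.EqOn ((u.reg .rdi).toNat + 1400 + 8 * b) ((u.reg .rdi).toNat + 1408 + 8 * b) v.mem s_10c23cr.mem := by
    u_eqon
  have hB3 : Mem.EqOn ((u.reg .rdi).toNat + 1416 + 8 * b) ((u.reg .rdi).toNat + 1424 + 8 * b) s_10c23c.mem s_10c23cr.mem := by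
    rw [w_mem_10c23c]
    u_eqon
  have hseg3 : Mem.SameExcept
      [⟨(u.reg .rsp).toNat - 256, (u.reg .rsp).toNat⟩,
       ⟨(u.reg .rdi).toNat + 8, (u.reg .rdi).toNat + 12⟩,
       ⟨(u.reg .rdi).toNat + 128, (u.reg .rdi).toNat + 132⟩,
       shadowSpan (A.B + A.S) (A.B + A.T),
       ⟨(u.reg .rdi).toNat + 1416 + 8 * b, (u.reg .rdi).toNat + 1424 + 8 * b⟩] v.mem s_10c23cr.mem := by
    u_same
  have hsame3 : Mem.SameExcept FP u.mem s_10c23cr.mem := by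
    refine hsame2.trans (widenWins hseg3 ?_)
    intro w hw
    simp only [List.mem_cons, List.not_mem_nil, or_false] at hw
    rcases hw with rfl | rfl | rfl | rfl | rfl
    · exact Or.inr ⟨_, m_st, Nat.le_refl _, Nat.le_refl _⟩
    · exact Or.inr ⟨_, m_f8, Nat.le_refl _, Nat.le_refl _⟩
    · exact Or.inr ⟨_, m_f128, Nat.le_refl _, Nat.le_refl _⟩
    · exact Or.inr ⟨_, m_sh, Nat.le_refl _, Nat.le_refl _⟩
    · exact Or.inr ⟨_, m_B, Nat.le_refl _, Nat.le_refl _⟩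
  -- the exit: `AtCut3` for the returned state
  refine ReachVia.done ⟨A3, others3, ⟨⟨he0, hpre0, w_eq, w_inv, w_rsp, (w_kept .rbx rfl).trans c_rbx, (w_kept .rbp rfl).trans c_rbp,
    (w_kept .r12 rfl).trans c_r12, ?_, ?_, ?_, ?_, ?_, ?_, ?_, ?_, ?_, ?_, ?_, hM3⟩, w_rip, (w_kept .r13 rfl).trans c_r13,
    (w_kept .r14 rfl).trans c_r14, ?_, ?_, ?_, ?_⟩⟩
  · exact slot64_of_eqOn hfr3 hbody.s_ret (by u_omega) (by u_omega) (by u_omega)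
  · exact slot64_of_eqOn hfr3 hbody.s_r15 (by u_omega) (by u_omega) (by u_omega)
  · exact slot64_of_eqOn hfr3 hbody.s_r14 (by u_omega) (by u_omega) (by u_omega)
  · exact slot64_of_eqOn hfr3 hbody.s_r13 (by u_omega) (by u_omega) (by u_omega)
  · exact slot64_of_eqOn hfr3 hbody.s_r12 (by u_omega) (by u_omega) (by u_omega)
  · exact slot64_of_eqOn hfr3 hbody.s_rbp (by u_omega) (by u_omega) (by u_omega)
  · exact slot64_of_eqOn hfr3 hbody.s_rbx (by u_omega) (by u_omega) (by u_omega)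
  · exact slot_of_eqOn hfn3 hbody.s_n2 (by u_omega) (by u_omega) (by u_omega)
  · exact slot_of_eqOn hfr3 hbody.s_n4 (by u_omega) (by u_omega) (by u_omega)
  · exact slot_of_eqOn hfr3 hbody.s_n8 (by u_omega) (by u_omega) (by u_omega)
  · simp only [X86.User.Spec.footprint, vspec, hbq]
    rw [← hFP]
    exact hsame3
  · exact slot_of_eqOn hfr3 hspa (by u_omega) (by u_omega) (by u_omega)
  · rw [hnq]
    have hA : UInt64.ofNat (s_10c23cr.mem.readLE
        (u.reg .rdi + (Word.ofBV (BitVec.signExtend 64 (Word.part .w32 (u.reg .rsi))) + 174) * 8 + 8) 8) =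
        UInt64.ofNat (v.mem.readLE
        (u.reg .rdi + (Word.ofBV (BitVec.signExtend 64 (Word.part .w32 (u.reg .rsi))) + 174) * 8 + 8) 8) :=
      slot64_of_eqOn hA3 rfl (by u_omega) (by u_omega) (by u_omega)
    rw [hA]
    exact hptrA.mono hE3
  · rw [hnq]
    have hB : UInt64.ofNat (s_10c23cr.mem.readLE
        (u.reg .rdi + (Word.ofBV (BitVec.signExtend 64 (Word.part .w32 (u.reg .rsi))) + 176) * 8 + 8) 8) = pB :=
      slot64_of_eqOn hB3 G_B (by u_omega) (by u_omega) (by u_omega)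
    rw [hB]
    exact hresB.mono hE3
  · rw [hnq]
    rcases hres3 with ⟨h0, _⟩ | ⟨_, _, hs, k1, k2⟩
    · exact Or.inl h0
    · exact Or.inr ⟨hs, k1, k2⟩

/-- **At `cut9` (0x10c345, the common epilogue `add rsp, 28H ; pop … ; ret`)**: rax is the result, and the contract's two
conditional clauses hold for the present memory (the epilogue writes nothing). Reached from `cut8` (`mov eax, 1 ; jmp`), from the
return of `error` at 0x10c340, and from `cut10` / `cut11` (`jmp`). -/
structure AtCut9 (u₀ : State) (others : List Obj) (frames : List (Nat × FrameLayout)) (A : Arena) (k : Nat) (e : State)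
    (ret : Word) (A' : Arena) (others' : List Obj) (v : State) : Prop where
  /-- the shared part -/
  body : InBody u₀ others frames A k e ret A' others' v
  /-- the cut point -/
  rip : v.rip = L.init_blocksize.cut9
  /-- TRUE or FALSE -/
  rax : v.reg .rax = 1 ∨ v.reg .rax = 0
  /-- success: M3 and M4 for index `b`, the five tables allocated by this call -/
  ok : v.reg .rax = 1 →
    Mdct.Tables (Since A A') v.mem (e.reg .rdi).toNat (arg32 e .rsi) (arg32 e .rdx) ∧
    Mdct.RevOK v.mem (stb_vorbis.bit_reverse v.mem (e.reg .rdi).toNat (arg32 e .rsi)) (arg32 e .rdx)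
  /-- failure: `f->error = VORBIS_outofmem` -/
  err : v.reg .rax = 0 → stb_vorbis.error v.mem (e.reg .rdi).toNat = 3

set_option maxRecDepth 8000 in
set_option maxHeartbeats 64000000 in
/-- **The last segment of the proposed split** (`cut9` 0x10c345 … `ret`; line 1328): the epilogue. From the assertion `AtCut9` to
the contract's `Returned`: the post is `Carry` with the stack pointer raised back over the frame (`Carry.raise`) and the two
conditional clauses of the assertion. -/
theorem seg9 {Lay : Layout} (hLay : Lay.hi = 0x1000000) {μ : Microarch} (hμ : UserX.MicroOK μ) {u₀ : State}
    (hcode : HasCodeNat Lay u₀ Vorbis.L.init_blocksize.entry Vorbis.Code.code_init_blocksize.nat Vorbis.L.init_blocksize.size)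
    (others : List Obj) (frames : List (Nat × FrameLayout)) (A : Arena) (k : Nat) (u : State) (ret : Word)
    (A' : Arena) (others' : List Obj) (v : State) (hat : AtCut9 u₀ others frames A k u ret A' others' v) :
    ReachVia Lay μ Vorbis.WayInv v (Returned (Vorbis.conv u₀) (init_blocksize.spec others frames A k) u ret) := by
  obtain ⟨hbody, hrip, hrax, hok, herr⟩ := hat
  have he := hbody.entry
  have hpre := hbody.pre
  v_entry he
  obtain ⟨hap, hlive, hb, hld, hlogobj, hlogin⟩ := hpre
  have hsh := hap.shadow
  have hsp := hsh.rsp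
  have hfrm : ∀ bF, bF ∈ frames → (u.reg .rsp).toNat + 8 ≤ bF.1 := fun bF hbF => (hsh.inv.stack.active bF hbF).2.2.1
  -- the present state: rip, rsp, the code span, DF / MXCSR; the seven slots the epilogue pops
  have c_rip : v.rip = Vorbis.L.init_blocksize.cut9 := hrip
  have c_rsp := hbody.rsp
  have w_eq : Mem.EqOn Vorbis.L.textLo Vorbis.L.textHi u₀.mem v.mem := hbody.code
  have hdf : v.flags .df = false := (show abiInv _ from hbody.inv).1
  have hmx : v.mxcsr &&& 0x1F80 = 0x1F80 := (show abiInv _ from hbody.inv).2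
  have hsse := Vorbis.sseOK_of_abiInv hbody.inv
  have s0 := hbody.s_ret
  have s1 := hbody.s_r15
  have s2 := hbody.s_r14
  have s3 := hbody.s_r13
  have s4 := hbody.s_r12
  have s5 := hbody.s_rbp
  have s6 := hbody.s_rbx
  u_walk hcode [hμ.vendor] span [Vorbis.L.textLo, Vorbis.L.textHi] side (v_side)
  refine ReachVia.done ?_
  have hR := hbody.mid.raise (top' := (u.reg .rsp).toNat + 8) (by omega) (by omega) (by omega) hfrm
  have erax : s_10c353.reg .rax = v.reg .rax := w_kept .rax rfl
  refine X86.User.Returned.mk w_rip w_rsp ?r_saved ?r_same (Vorbis.conv_code_in w_eq) ?r_inv ?r_post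
  case r_saved =>
    intro r hr
    cases r <;> first
      | exact absurd hr (by decide)
      | (with_reducible assumption)
  case r_same =>
    rw [w_mem]
    exact hbody.same
  case r_inv => v_inv
  case r_post =>
    show ∃ (A'' : Arena) (others'' : List Obj), _
    refine ⟨A', others', hR.ext, hR.temps, hR.T, ?_, ?_, hR.sub, hR.sup, ?_, ?_, ?_⟩
    · rw [w_mem]
      exact hR.arena
    · rw [w_mem]
      exact hR.shadow
    · rw [erax]
      exact hrax
    · rw [erax, w_mem]
      exact hok
    · rw [erax, w_mem]
      exact herr

/-- **At `cut8` (0x10c331, after `compute_bitreverse`)**: M3 and M4 for index `b` hold in the present memory. -/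
structure AtCut8 (u₀ : State) (others : List Obj) (frames : List (Nat × FrameLayout)) (A : Arena) (k : Nat) (e : State)
    (ret : Word) (A' : Arena) (others' : List Obj) (v : State) : Prop where
  /-- the shared part -/
  body : InBody u₀ others frames A k e ret A' others' v
  /-- the cut point -/
  rip : v.rip = L.init_blocksize.cut8
  /-- M3: the five tables, allocated by this call -/
  tables : Mdct.Tables (Since A A') v.mem (e.reg .rdi).toNat (arg32 e .rsi) (arg32 e .rdx)
  /-- M4 -/
  rev : Mdct.RevOK v.mem (stb_vorbis.bit_reverse v.mem (e.reg .rdi).toNat (arg32 e .rsi)) (arg32 e .rdx)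

/-- **At the return of an `error(f, VORBIS_outofmem)`** (`cut` = `cut9` for the call at 0x10c340, `cut10`, `cut11` for the other
two, each followed by `jmp cut9`): rax = 0 and `f->error = 3`. -/
structure AtErr (cut : Word) (u₀ : State) (others : List Obj) (frames : List (Nat × FrameLayout)) (A : Arena) (k : Nat)
    (e : State) (ret : Word) (A' : Arena) (others' : List Obj) (v : State) : Prop where
  /-- the shared part -/
  body : InBody u₀ others frames A k e ret A' others' v
  /-- the cut point -/
  rip : v.rip = cut
  /-- `error` returns 0 -/
  rax : v.reg .rax = 0
  /-- `f->error = VORBIS_outofmem` -/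
  err : stb_vorbis.error v.mem (e.reg .rdi).toNat = 3

/-- The return of the first `error` call IS the epilogue's cut point. -/
theorem AtErr.atCut9 {u₀ : State} {others : List Obj} {frames : List (Nat × FrameLayout)} {A : Arena} {k : Nat} {e : State}
    {ret : Word} {A' : Arena} {others' : List Obj} {v : State}
    (h : AtErr L.init_blocksize.cut9 u₀ others frames A k e ret A' others' v) :
    AtCut9 u₀ others frames A k e ret A' others' v := by
  refine ⟨h.body, h.rip, Or.inr h.rax, ?_, fun _ => h.err⟩
  intro h1
  rw [h.rax] at h1
  exact absurd h1 (by decide)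

set_option maxRecDepth 8000 in
set_option maxHeartbeats 64000000 in
/-- **`cut8` … `cut9`** (`mov eax, 1 ; jmp 10c345`; line 1327 `return TRUE`): from `AtCut8` to `AtCut9` with rax = 1. -/
theorem seg8b {Lay : Layout} (hLay : Lay.hi = 0x1000000) {μ : Microarch} (hμ : UserX.MicroOK μ) {u₀ : State}
    (hcode : HasCodeNat Lay u₀ Vorbis.L.init_blocksize.entry Vorbis.Code.code_init_blocksize.nat Vorbis.L.init_blocksize.size)
    (others : List Obj) (frames : List (Nat × FrameLayout)) (A : Arena) (k : Nat) (u : State) (ret : Word)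
    (A' : Arena) (others' : List Obj) (v : State) (hat : AtCut8 u₀ others frames A k u ret A' others' v) :
    ReachVia Lay μ Vorbis.WayInv v (AtCut9 u₀ others frames A k u ret A' others') := by
  obtain ⟨hbody, hrip, htab, hrev⟩ := hat
  have he := hbody.entry
  v_entry he
  have c_rip : v.rip = Vorbis.L.init_blocksize.cut8 := hrip
  have w_eq : Mem.EqOn Vorbis.L.textLo Vorbis.L.textHi u₀.mem v.mem := hbody.code
  have hdf : v.flags .df = false := (show abiInv _ from hbody.inv).1
  have hmx : v.mxcsr &&& 0x1F80 = 0x1F80 := (show abiInv _ from hbody.inv).2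
  have hsse := Vorbis.sseOK_of_abiInv hbody.inv
  u_walk hcode [hμ.vendor] until [Vorbis.L.init_blocksize.cut9] span [Vorbis.L.textLo, Vorbis.L.textHi] side (v_side)
  have hinv : (Vorbis.conv u₀).inv s_10c336 := by v_inv
  refine ReachVia.done ⟨⟨hbody.entry, hbody.pre, w_eq, hinv, ?_, ?_, ?_, ?_, ?_, ?_, ?_, ?_, ?_, ?_, ?_, ?_, ?_, ?_, ?_, ?_⟩,
    by rw [w_rip]; rfl, Or.inl (by rw [w_rax]; rfl), ?_, ?_⟩
  · rw [w_kept .rsp rfl]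
    exact hbody.rsp
  · rw [w_kept .rbx rfl]
    exact hbody.rbx
  · rw [w_kept .rbp rfl]
    exact hbody.rbp
  · rw [w_kept .r12 rfl]
    exact hbody.r12
  · rw [w_mem]
    exact hbody.s_ret
  · rw [w_mem]
    exact hbody.s_r15
  · rw [w_mem]
    exact hbody.s_r14
  · rw [w_mem]
    exact hbody.s_r13
  · rw [w_mem]
    exact hbody.s_r12
  · rw [w_mem]
    exact hbody.s_rbp
  · rw [w_mem]
    exact hbody.s_rbx
  · rw [w_mem]
    exact hbody.s_n2
  · rw [w_mem]
    exact hbody.s_n4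
  · rw [w_mem]
    exact hbody.s_n8
  · rw [w_mem]
    exact hbody.same
  · rw [w_mem]
    exact hbody.mid
  · intro _
    rw [w_mem]
    exact ⟨htab, hrev⟩
  · intro h0
    rw [w_rax] at h0
    exact absurd h0 (by decide)

/-! ### Segment 5: an allocation with tables already allocated -/

/-- A pointer field of `*f` reads the same in two memories that agree on its eight bytes. -/
theorem ptr_of_eqOn {m m' : Mem} {a hi : Nat} (he : Mem.EqOn a hi m m') (h8 : a + 8 ≤ hi) (ha : a + 8 < 2 ^ 64) :
    m'.ptr a = m.ptr a := by
  unfold Mem.ptr Mem.u64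
  have e := toNat_addr a (by omega)
  exact he.readLE (addr a) 8 (by rw [e]; exact Nat.le_refl _) (by rw [e]; exact h8) (by rw [e]; exact ha)

/-- **The three twiddle tables are allocated** (after the three NULL tests of line 1319): `A[b]`, `B[b]`, `C[b]`, read from the
present memory, are blocks allocated by this call, of `2n`, `2n`, `n` bytes — three of the five fields of `Mdct.Tables`. -/
structure Tab3 (A A' : Arena) (mem : Mem) (f b n : Nat) : Prop where
  /-- `Block(A[b], 2 n)` -/
  tA : Since A A' ⟨stb_vorbis.A mem f b, 2 * n⟩
  /-- `Block(B[b], 2 n)` -/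
  tB : Since A A' ⟨stb_vorbis.B mem f b, 2 * n⟩
  /-- `Block(C[b], n)` -/
  tC : Since A A' ⟨stb_vorbis.C mem f b, n⟩

/-- The tables follow the memory (the three pointer fields read the same) and the arena (AR7). -/
theorem Tab3.carry {A A' A'' : Arena} {mem mem' : Mem} {f b n : Nat} (h : Tab3 A A' mem f b n) (he : A'.Extends A'')
    (hf : f + 1808 < 2 ^ 64) (hb : b < 2)
    (hA : Mem.EqOn (f + 1400 + 8 * b) (f + 1408 + 8 * b) mem mem')
    (hB : Mem.EqOn (f + 1416 + 8 * b) (f + 1424 + 8 * b) mem mem')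
    (hC : Mem.EqOn (f + 1432 + 8 * b) (f + 1440 + 8 * b) mem mem') : Tab3 A A'' mem' f b n := by
  obtain ⟨tA, tB, tC⟩ := h
  have eA : stb_vorbis.A mem' f b = stb_vorbis.A mem f b := by
    simp only [vacc, voff]
    exact ptr_of_eqOn (a := f + 1400 + 8 * b) hA (by omega) (by omega)
  have eB : stb_vorbis.B mem' f b = stb_vorbis.B mem f b := by
    simp only [vacc, voff]
    exact ptr_of_eqOn (a := f + 1416 + 8 * b) hB (by omega) (by omega)
  have eC : stb_vorbis.C mem' f b = stb_vorbis.C mem f b := by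
    simp only [vacc, voff]
    exact ptr_of_eqOn (a := f + 1432 + 8 * b) hC (by omega) (by omega)
  refine ⟨?_, ?_, ?_⟩
  · rw [eA]
    exact tA.mono he
  · rw [eB]
    exact tB.mono he
  · rw [eC]
    exact tC.mono he

/-- **At `cut4` (0x10c2ba, after `compute_twiddle_factors`)**: the three twiddle tables are allocated. -/
structure AtCut4 (u₀ : State) (others : List Obj) (frames : List (Nat × FrameLayout)) (A : Arena) (k : Nat) (e : State)
    (ret : Word) (A' : Arena) (others' : List Obj) (v : State) : Prop where
  /-- the shared part -/
  body : InBody u₀ others frames A k e ret A' others' v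
  /-- the cut point -/
  rip : v.rip = L.init_blocksize.cut4
  /-- `A[b]`, `B[b]`, `C[b]` -/
  tabs : Tab3 A A' v.mem (e.reg .rdi).toNat ((e.reg .rsi).toNat % 2 ^ 32) ((e.reg .rdx).toNat % 2 ^ 32)

/-- **At `cut5` (0x10c2c6, after `setup_malloc(f, 2n)` for `window[b]`)**: as `AtCut4`, rax is the result. -/
structure AtCut5 (u₀ : State) (others : List Obj) (frames : List (Nat × FrameLayout)) (A : Arena) (k : Nat) (e : State)
    (ret : Word) (A' : Arena) (others' : List Obj) (v : State) : Prop where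
  /-- the shared part -/
  body : InBody u₀ others frames A k e ret A' others' v
  /-- the cut point -/
  rip : v.rip = L.init_blocksize.cut5
  /-- `A[b]`, `B[b]`, `C[b]` -/
  tabs : Tab3 A A' v.mem (e.reg .rdi).toNat ((e.reg .rsi).toNat % 2 ^ 32) ((e.reg .rdx).toNat % 2 ^ 32)
  /-- rax = NULL or the new block of `2n` bytes -/
  res : Res A A' (2 * ((e.reg .rdx).toNat % 2 ^ 32)) (v.reg .rax)

set_option maxRecDepth 8000 in
set_option maxHeartbeats 64000000 in
/-- **Segment 5 of the proposed split** (`cut4` 0x10c2ba … `cut5` 0x10c2c6; line 1321): `setup_malloc(f, 2n)` for `window[b]`.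
From `AtCut4` to `AtCut5`: a table already allocated is carried over an allocation by `Tab3.carry` (`Since.mono` + the pointer
fields read the same). Segment 7 (`cut6` … `cut7`, `add esi, esi`) is the same with four tables. -/
theorem seg5 {Lay : Layout} (hLay : Lay.hi = 0x1000000) {μ : Microarch} (hμ : UserX.MicroOK μ) {u₀ : State}
    (hcode : HasCodeNat Lay u₀ Vorbis.L.init_blocksize.entry Vorbis.Code.code_init_blocksize.nat Vorbis.L.init_blocksize.size)
    (h_sm : ∀ (others : List Obj) (frames : List (Nat × FrameLayout)) (A : Arena),
      Calls Lay μ Vorbis.WayInv (Vorbis.conv u₀) Vorbis.L.setup_malloc.entry (Vorbis.Spec.setup_malloc.spec others frames A))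
    (others : List Obj) (frames : List (Nat × FrameLayout)) (A : Arena) (k : Nat) (u : State) (ret : Word)
    (A4 : Arena) (others4 : List Obj) (v : State) (hat : AtCut4 u₀ others frames A k u ret A4 others4 v) :
    ReachVia Lay μ Vorbis.WayInv v (fun w => ∃ (A' : Arena) (others' : List Obj), AtCut5 u₀ others frames A k u ret A' others' w) := by
  obtain ⟨hbody, hrip, htabs⟩ := hat
  have he := hbody.entry
  have hpre := hbody.pre
  have he0 := he
  have hpre0 := hpre
  v_entry he
  obtain ⟨hap, hlive, hb, hld, hlogobj, hlogin⟩ := hpre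
  have hsh := hap.shadow
  have hsp := hsh.rsp
  rw [arg32_def] at hb hld
  -- the two `int` arguments, named
  generalize hbq : (u.reg .rsi).toNat % 2 ^ 32 = b at hb
  generalize hnq : (u.reg .rdx).toNat % 2 ^ 32 = n at hld
  -- where `*f` is; where the free gap of the arena is
  have hwhere := hlive.where_ hsh.inv hsh.offText (by decide)
  simp only [Vorbis.Off.sizeof.stb_vorbis] at hwhere hlive
  have hgap := obj_off_gap hlive hap.arena hsh.inv
  have hbounds := hap.arena.bounds
  have h1x := hap.arena.AR1x
  have htext : 0x119d40 ≤ A.B := hap.offText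
  have hflog := obj_off_log2 hlive hlogobj hsh.inv
  have halog := arena_off_log2 hap.arena hlogobj
  have hfrm : ∀ bF, bF ∈ frames → (u.reg .rsp).toNat + 8 ≤ bF.1 := fun bF hbF => (hsh.inv.stack.active bF hbF).2.2.1
  have hsx : (Word.ofBV (BitVec.signExtend 64 (Word.part .w32 (u.reg .rsi)))).toNat = b := by
    rw [← hbq, ← arg32_def]
    exact arg32_sext u .rsi (by rw [arg32_def]; omega)
  have hnv : (Word.part .w32 (u.reg .rdx)).toNat = n := by
    rw [← hnq]
    exact Asan.part32_toNat _
  have hfacts := hld.isBlocksize.facts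
  have hz2 := size_n2 hnv hld
  have hz4 := size_n4 hnv hld
  have hz8 := size_n8 hnv hld
  have hshlo : (shadowSpan (A.B + A.S) (A.B + A.T)).lo = 0xC00000 + (A.B + A.S) / 8 := rfl
  have hshhi : (shadowSpan (A.B + A.S) (A.B + A.T)).hi = 0xC00000 + (A.B + A.T + 7) / 8 := rfl
  -- the contract's footprint, named, and its windows
  obtain ⟨FP, hFP⟩ : ∃ FP : List Span, FP =
      [⟨(u.reg .rsp).toNat - 256, (u.reg .rsp).toNat⟩, ⟨(u.reg .rdi).toNat + 8, (u.reg .rdi).toNat + 12⟩, ⟨(u.reg .rdi).toNat + 128, (u.reg .rdi).toNat + 132⟩, ⟨(u.reg .rdi).toNat + 140, (u.reg .rdi).toNat + 144⟩, ⟨(u.reg .rdi).toNat + 1400 + 8 * b, (u.reg .rdi).toNat + 1408 + 8 * b⟩, ⟨(u.reg .rdi).toNat + 1416 + 8 * b, (u.reg .rdi).toNat + 1424 + 8 * b⟩, ⟨(u.reg .rdi).toNat + 1432 + 8 * b, (u.reg .rdi).toNat + 1440 + 8 * b⟩, ⟨(u.reg .rdi).toNat + 1448 + 8 * b, (u.reg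 .rdi).toNat + 1456 + 8 * b⟩, ⟨(u.reg .rdi).toNat + 1464 + 8 * b, (u.reg .rdi).toNat + 1472 + 8 * b⟩,
       ⟨A.B + A.S, A.B + A.T⟩, shadowSpan (A.B + A.S) (A.B + A.T)] := ⟨_, rfl⟩
  have m_st : (⟨(u.reg .rsp).toNat - 256, (u.reg .rsp).toNat⟩ : Span) ∈ FP := by rw [hFP]; simp only [List.mem_cons, true_or]
  have m_f8 : (⟨(u.reg .rdi).toNat + 8, (u.reg .rdi).toNat + 12⟩ : Span) ∈ FP := by rw [hFP]; simp only [List.mem_cons, true_or, or_true]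
  have m_f128 : (⟨(u.reg .rdi).toNat + 128, (u.reg .rdi).toNat + 132⟩ : Span) ∈ FP := by rw [hFP]; simp only [List.mem_cons, true_or, or_true]
  have m_f140 : (⟨(u.reg .rdi).toNat + 140, (u.reg .rdi).toNat + 144⟩ : Span) ∈ FP := by rw [hFP]; simp only [List.mem_cons, true_or, or_true]
  have m_A : (⟨(u.reg .rdi).toNat + 1400 + 8 * b, (u.reg .rdi).toNat + 1408 + 8 * b⟩ : Span) ∈ FP := by rw [hFP]; simp only [List.mem_cons, true_or, or_true]
  have m_B : (⟨(u.reg .rdi).toNat + 1416 + 8 * b, (u.reg .rdi).toNat + 1424 + 8 * b⟩ : Span) ∈ FP := by rw [hFP]; simp only [List.mem_cons, true_or, or_true]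
  have m_C : (⟨(u.reg .rdi).toNat + 1432 + 8 * b, (u.reg .rdi).toNat + 1440 + 8 * b⟩ : Span) ∈ FP := by rw [hFP]; simp only [List.mem_cons, true_or, or_true]
  have m_W : (⟨(u.reg .rdi).toNat + 1448 + 8 * b, (u.reg .rdi).toNat + 1456 + 8 * b⟩ : Span) ∈ FP := by rw [hFP]; simp only [List.mem_cons, true_or, or_true]
  have m_R : (⟨(u.reg .rdi).toNat + 1464 + 8 * b, (u.reg .rdi).toNat + 1472 + 8 * b⟩ : Span) ∈ FP := by rw [hFP]; simp only [List.mem_cons, true_or, or_true]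
  have m_gap : (⟨A.B + A.S, A.B + A.T⟩ : Span) ∈ FP := by rw [hFP]; simp only [List.mem_cons, true_or, or_true]
  have m_sh : (shadowSpan (A.B + A.S) (A.B + A.T)) ∈ FP := by rw [hFP]; simp only [List.mem_cons, true_or, or_true]
  -- the present state: the walker reads these by type
  have hM4 := hbody.mid
  have c_rip : v.rip = Vorbis.L.init_blocksize.cut4 := hrip
  have c_rsp := hbody.rsp
  have c_rbx := hbody.rbx
  have c_rbp := hbody.rbp
  have c_r12 := hbody.r12
  have w_eq : Mem.EqOn Vorbis.L.textLo Vorbis.L.textHi u₀.mem v.mem := hbody.code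
  have hdf : v.flags .df = false := (show abiInv _ from hbody.inv).1
  have hmx : v.mxcsr &&& 0x1F80 = 0x1F80 := (show abiInv _ from hbody.inv).2
  have hsse := Vorbis.sseOK_of_abiInv hbody.inv
  have hn2 := hbody.s_n2
  rw [hnq] at hn2
  rw [hnq, hbq] at htabs
  have hsame4 := hbody.same
  simp only [X86.User.Spec.footprint, vspec, hbq] at hsame4
  rw [← hFP] at hsame4
  have hsm4 := h_sm others4 frames A4
  -- ── call 4 (0x10c2c1): window[b] = setup_malloc(f, 2n), line 1321 ────────────────────────────────────────────────
  u_walk hcode [hμ.vendor] span [Vorbis.L.textLo, Vorbis.L.textHi] side (v_side)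
  case call_inv => v_inv
  case pre_10c2c1 =>
    have hM : Carry others frames A ((u.reg .rsp).toNat - 88) (u.reg .rdi).toNat A4 others4 s_10c2c1.mem := by
      refine hM4.frame (by omega) ?_ ?_
      · u_memnorm
        u_eqon
      · v_untouched
    exact hM.arenaPre hlive (by rw [w_rdi]) (by rw [w_rsp]; u_omega)
  have hM : Carry others frames A ((u.reg .rsp).toNat - 88) (u.reg .rdi).toNat A4 others4 s_10c2c1.mem := by
    refine hM4.frame (by omega) ?_ ?_
    · u_memnorm
      u_eqon
    · v_untouched
  have c_rdi5 : s_10c2c1.reg .rdi = u.reg .rdi := w_rdi_10c2c1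
  have c_rsi5 : (s_10c2c1.reg .rsi).toNat % 2 ^ 32 = 2 * n := by
    rw [w_rsi_10c2c1, Vorbis.toNat_ofBV32, BitVec.toNat_ofNat]
    omega
  obtain ⟨A5, others5, hM5, hE5, hres5⟩ := hM.malloc (by rw [c_rdi5]) (by rw [w_rsp_10c2c1]; u_omega) c_rsi5 w_post
  have w_eq := Vorbis.conv_code_eqOn w_code
  simp only [X86.User.Spec.footprint, vspec, w_rsp_10c2c1, c_rdi5, c_rsi5] at w_same
  replace w_same := same_shadow (a' := A.B + A.S) (b' := A.B + A.T) w_same (by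
    have hbd := hM.arena.bounds
    have hB1 := hM.ext.B
    have hS1 := hM.ext.S
    rcases hres5 with ⟨_, hun⟩ | ⟨_, hrax, _, k1, k2⟩
    · exact Or.inr ⟨hun, by omega⟩
    · exact Or.inl ⟨by omega, by omega⟩)
  rw [w_mem_10c2c1] at w_same
  have hfr5 : Mem.EqOn ((u.reg .rsp).toNat - 64) ((u.reg .rsp).toNat + 8) v.mem s_10c2c1r.mem := by
    u_eqon
  have hfn5 : Mem.EqOn ((u.reg .rsp).toNat - 84) ((u.reg .rsp).toNat - 80) v.mem s_10c2c1r.mem := by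
    u_eqon
  have hA5 : Mem.EqOn ((u.reg .rdi).toNat + 1400 + 8 * b) ((u.reg .rdi).toNat + 1408 + 8 * b) v.mem s_10c2c1r.mem := by
    u_eqon
  have hB5 : Mem.EqOn ((u.reg .rdi).toNat + 1416 + 8 * b) ((u.reg .rdi).toNat + 1424 + 8 * b) v.mem s_10c2c1r.mem := by
    u_eqon
  have hC5 : Mem.EqOn ((u.reg .rdi).toNat + 1432 + 8 * b) ((u.reg .rdi).toNat + 1440 + 8 * b) v.mem s_10c2c1r.mem := by
    u_eqon
  have hseg5 : Mem.SameExcept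
      [⟨(u.reg .rsp).toNat - 256, (u.reg .rsp).toNat⟩,
       ⟨(u.reg .rdi).toNat + 8, (u.reg .rdi).toNat + 12⟩,
       ⟨(u.reg .rdi).toNat + 128, (u.reg .rdi).toNat + 132⟩,
       shadowSpan (A.B + A.S) (A.B + A.T)] v.mem s_10c2c1r.mem := by
    u_same
  have hsame5 : Mem.SameExcept FP u.mem s_10c2c1r.mem := by
    refine hsame4.trans (widenWins hseg5 ?_)
    intro w hw
    simp only [List.mem_cons, List.not_mem_nil, or_false] at hw
    rcases hw with rfl | rfl | rfl | rfl
    · exact Or.inr ⟨_, m_st, Nat.le_refl _, Nat.le_refl _⟩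
    · exact Or.inr ⟨_, m_f8, Nat.le_refl _, Nat.le_refl _⟩
    · exact Or.inr ⟨_, m_f128, Nat.le_refl _, Nat.le_refl _⟩
    · exact Or.inr ⟨_, m_sh, Nat.le_refl _, Nat.le_refl _⟩
  -- the exit: `AtCut5` for the returned state
  refine ReachVia.done ⟨A5, others5, ⟨⟨he0, hpre0, w_eq, w_inv, w_rsp, (w_kept .rbx rfl).trans c_rbx, (w_kept .rbp rfl).trans c_rbp,
    (w_kept .r12 rfl).trans c_r12, ?_, ?_, ?_, ?_, ?_, ?_, ?_, ?_, ?_, ?_, ?_, hM5⟩, w_rip, ?_, ?_⟩⟩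
  · exact slot64_of_eqOn hfr5 hbody.s_ret (by u_omega) (by u_omega) (by u_omega)
  · exact slot64_of_eqOn hfr5 hbody.s_r15 (by u_omega) (by u_omega) (by u_omega)
  · exact slot64_of_eqOn hfr5 hbody.s_r14 (by u_omega) (by u_omega) (by u_omega)
  · exact slot64_of_eqOn hfr5 hbody.s_r13 (by u_omega) (by u_omega) (by u_omega)
  · exact slot64_of_eqOn hfr5 hbody.s_r12 (by u_omega) (by u_omega) (by u_omega)
  · exact slot64_of_eqOn hfr5 hbody.s_rbp (by u_omega) (by u_omega) (by u_omega)
  · exact slot64_of_eqOn hfr5 hbody.s_rbx (by u_omega) (by u_omega) (by u_omega)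
  · exact slot_of_eqOn hfn5 hbody.s_n2 (by u_omega) (by u_omega) (by u_omega)
  · exact slot_of_eqOn hfr5 hbody.s_n4 (by u_omega) (by u_omega) (by u_omega)
  · exact slot_of_eqOn hfr5 hbody.s_n8 (by u_omega) (by u_omega) (by u_omega)
  · simp only [X86.User.Spec.footprint, vspec, hbq]
    rw [← hFP]
    exact hsame5
  · rw [hnq, hbq]
    exact htabs.carry hE5 (by omega) hb hA5 hB5 hC5
  · rw [hnq]
    rcases hres5 with ⟨h0, _⟩ | ⟨_, _, hs, k1, k2⟩
    · exact Or.inl h0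
    · exact Or.inr ⟨hs, k1, k2⟩

/-! ### The two `jmp`s from the error returns to the epilogue -/

set_option maxRecDepth 8000 in
set_option maxHeartbeats 64000000 in
/-- **`cut10` … `cut9`** (`jmp 10c345` after the `error` call of line 1322): from `AtErr` to `AtCut9` with rax = 0. -/
theorem seg10 {Lay : Layout} (hLay : Lay.hi = 0x1000000) {μ : Microarch} (hμ : UserX.MicroOK μ) {u₀ : State}
    (hcode : HasCodeNat Lay u₀ Vorbis.L.init_blocksize.entry Vorbis.Code.code_init_blocksize.nat Vorbis.L.init_blocksize.size)
    (others : List Obj) (frames : List (Nat × FrameLayout)) (A : Arena) (k : Nat) (u : State) (ret : Word)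
    (A' : Arena) (others' : List Obj) (v : State)
    (hat : AtErr Vorbis.L.init_blocksize.cut10 u₀ others frames A k u ret A' others' v) :
    ReachVia Lay μ Vorbis.WayInv v (AtCut9 u₀ others frames A k u ret A' others') := by
  obtain ⟨hbody, hrip, hrax, herr⟩ := hat
  have he := hbody.entry
  v_entry he
  have c_rip : v.rip = Vorbis.L.init_blocksize.cut10 := hrip
  have w_eq : Mem.EqOn Vorbis.L.textLo Vorbis.L.textHi u₀.mem v.mem := hbody.code
  have hdf : v.flags .df = false := (show abiInv _ from hbody.inv).1
  have hmx : v.mxcsr &&& 0x1F80 = 0x1F80 := (show abiInv _ from hbody.inv).2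
  have hsse := Vorbis.sseOK_of_abiInv hbody.inv
  u_walk hcode [hμ.vendor] until [Vorbis.L.init_blocksize.cut9] span [Vorbis.L.textLo, Vorbis.L.textHi] side (v_side)
  have hinv : (Vorbis.conv u₀).inv s_10c361 := by v_inv
  have erax : s_10c361.reg .rax = 0 := (w_kept .rax rfl).trans hrax
  refine ReachVia.done ⟨⟨hbody.entry, hbody.pre, w_eq, hinv, ?_, ?_, ?_, ?_, ?_, ?_, ?_, ?_, ?_, ?_, ?_, ?_, ?_, ?_, ?_, ?_⟩,
    by rw [w_rip]; rfl, Or.inr erax, ?_, ?_⟩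
  · rw [w_kept .rsp rfl]
    exact hbody.rsp
  · rw [w_kept .rbx rfl]
    exact hbody.rbx
  · rw [w_kept .rbp rfl]
    exact hbody.rbp
  · rw [w_kept .r12 rfl]
    exact hbody.r12
  · rw [w_mem]
    exact hbody.s_ret
  · rw [w_mem]
    exact hbody.s_r15
  · rw [w_mem]
    exact hbody.s_r14
  · rw [w_mem]
    exact hbody.s_r13
  · rw [w_mem]
    exact hbody.s_r12
  · rw [w_mem]
    exact hbody.s_rbp
  · rw [w_mem]
    exact hbody.s_rbx
  · rw [w_mem]
    exact hbody.s_n2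
  · rw [w_mem]
    exact hbody.s_n4
  · rw [w_mem]
    exact hbody.s_n8
  · rw [w_mem]
    exact hbody.same
  · rw [w_mem]
    exact hbody.mid
  · intro h1
    rw [erax] at h1
    exact absurd h1 (by decide)
  · intro _
    rw [w_mem]
    exact herr

set_option maxRecDepth 8000 in
set_option maxHeartbeats 64000000 in
/-- **`cut11` … `cut9`** (`jmp 10c345` after the `error` call of line 1325): from `AtErr` to `AtCut9` with rax = 0. -/
theorem seg11 {Lay : Layout} (hLay : Lay.hi = 0x1000000) {μ : Microarch} (hμ : UserX.MicroOK μ) {u₀ : State}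
    (hcode : HasCodeNat Lay u₀ Vorbis.L.init_blocksize.entry Vorbis.Code.code_init_blocksize.nat Vorbis.L.init_blocksize.size)
    (others : List Obj) (frames : List (Nat × FrameLayout)) (A : Arena) (k : Nat) (u : State) (ret : Word)
    (A' : Arena) (others' : List Obj) (v : State)
    (hat : AtErr Vorbis.L.init_blocksize.cut11 u₀ others frames A k u ret A' others' v) :
    ReachVia Lay μ Vorbis.WayInv v (AtCut9 u₀ others frames A k u ret A' others') := by
  obtain ⟨hbody, hrip, hrax, herr⟩ := hat
  have he := hbody.entry
  v_entry he
  have c_rip : v.rip = Vorbis.L.init_blocksize.cut11 := hrip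
  have w_eq : Mem.EqOn Vorbis.L.textLo Vorbis.L.textHi u₀.mem v.mem := hbody.code
  have hdf : v.flags .df = false := (show abiInv _ from hbody.inv).1
  have hmx : v.mxcsr &&& 0x1F80 = 0x1F80 := (show abiInv _ from hbody.inv).2
  have hsse := Vorbis.sseOK_of_abiInv hbody.inv
  u_walk hcode [hμ.vendor] until [Vorbis.L.init_blocksize.cut9] span [Vorbis.L.textLo, Vorbis.L.textHi] side (v_side)
  have hinv : (Vorbis.conv u₀).inv s_10c370 := by v_inv
  have erax : s_10c370.reg .rax = 0 := (w_kept .rax rfl).trans hrax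
  refine ReachVia.done ⟨⟨hbody.entry, hbody.pre, w_eq, hinv, ?_, ?_, ?_, ?_, ?_, ?_, ?_, ?_, ?_, ?_, ?_, ?_, ?_, ?_, ?_, ?_⟩,
    by rw [w_rip]; rfl, Or.inr erax, ?_, ?_⟩
  · rw [w_kept .rsp rfl]
    exact hbody.rsp
  · rw [w_kept .rbx rfl]
    exact hbody.rbx
  · rw [w_kept .rbp rfl]
    exact hbody.rbp
  · rw [w_kept .r12 rfl]
    exact hbody.r12
  · rw [w_mem]
    exact hbody.s_ret
  · rw [w_mem]
    exact hbody.s_r15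
  · rw [w_mem]
    exact hbody.s_r14
  · rw [w_mem]
    exact hbody.s_r13
  · rw [w_mem]
    exact hbody.s_r12
  · rw [w_mem]
    exact hbody.s_rbp
  · rw [w_mem]
    exact hbody.s_rbx
  · rw [w_mem]
    exact hbody.s_n2
  · rw [w_mem]
    exact hbody.s_n4
  · rw [w_mem]
    exact hbody.s_n8
  · rw [w_mem]
    exact hbody.same
  · rw [w_mem]
    exact hbody.mid
  · intro h1
    rw [erax] at h1
    exact absurd h1 (by decide)
  · intro _
    rw [w_mem]
    exact herr

/-! ### Segment 7: the fifth allocation -/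

/-- `add esi, esi` of `n8` loaded from the frame: the size `sizeof(uint16) * n8 = n / 4` of `bit_reverse[b]`. -/
theorem add_n8 {n : Nat} (h1 : n % 64 = 0) (h2 : n ≤ 8192) :
    (Word.ofBV (BitVec.ofNat 32 (n / 8) + BitVec.ofNat 32 (n / 8))).toNat % 2 ^ 32 = n / 4 := by
  rw [Vorbis.toNat_ofBV32, BitVec.toNat_add, BitVec.toNat_ofNat]
  simp only [Nat.reducePow]
  omega

/-- **At `cut6` (0x10c2f4, after `compute_window`)**: the three twiddle tables and the window are allocated. -/
structure AtCut6 (u₀ : State) (others : List Obj) (frames : List (Nat × FrameLayout)) (A : Arena) (k : Nat) (e : State)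
    (ret : Word) (A' : Arena) (others' : List Obj) (v : State) : Prop where
  /-- the shared part -/
  body : InBody u₀ others frames A k e ret A' others' v
  /-- the cut point -/
  rip : v.rip = L.init_blocksize.cut6
  /-- `A[b]`, `B[b]`, `C[b]` -/
  tabs : Tab3 A A' v.mem (e.reg .rdi).toNat ((e.reg .rsi).toNat % 2 ^ 32) ((e.reg .rdx).toNat % 2 ^ 32)
  /-- `Block(window[b], 2 n)` -/
  tW : Since A A' ⟨stb_vorbis.window v.mem (e.reg .rdi).toNat ((e.reg .rsi).toNat % 2 ^ 32), 2 * ((e.reg .rdx).toNat % 2 ^ 32)⟩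

/-- **At `cut7` (0x10c302, after `setup_malloc(f, 2·n8)` for `bit_reverse[b]`)**: as `AtCut6`, rax is the result. -/
structure AtCut7 (u₀ : State) (others : List Obj) (frames : List (Nat × FrameLayout)) (A : Arena) (k : Nat) (e : State)
    (ret : Word) (A' : Arena) (others' : List Obj) (v : State) : Prop where
  /-- the shared part -/
  body : InBody u₀ others frames A k e ret A' others' v
  /-- the cut point -/
  rip : v.rip = L.init_blocksize.cut7
  /-- `A[b]`, `B[b]`, `C[b]` -/
  tabs : Tab3 A A' v.mem (e.reg .rdi).toNat ((e.reg .rsi).toNat % 2 ^ 32) ((e.reg .rdx).toNat % 2 ^ 32)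
  /-- `Block(window[b], 2 n)` -/
  tW : Since A A' ⟨stb_vorbis.window v.mem (e.reg .rdi).toNat ((e.reg .rsi).toNat % 2 ^ 32), 2 * ((e.reg .rdx).toNat % 2 ^ 32)⟩
  /-- rax = NULL or the new block of `n / 4` bytes -/
  res : Res A A' ((e.reg .rdx).toNat % 2 ^ 32 / 4) (v.reg .rax)

set_option maxRecDepth 8000 in
set_option maxHeartbeats 64000000 in
/-- **Segment 7 of the proposed split** (`cut6` 0x10c2f4 … `cut7` 0x10c302; line 1324): `setup_malloc(f, 2·n8)` for
`bit_reverse[b]`. From `AtCut6` to `AtCut7`: segment 5 with four tables. -/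
theorem seg7 {Lay : Layout} (hLay : Lay.hi = 0x1000000) {μ : Microarch} (hμ : UserX.MicroOK μ) {u₀ : State}
    (hcode : HasCodeNat Lay u₀ Vorbis.L.init_blocksize.entry Vorbis.Code.code_init_blocksize.nat Vorbis.L.init_blocksize.size)
    (h_sm : ∀ (others : List Obj) (frames : List (Nat × FrameLayout)) (A : Arena),
      Calls Lay μ Vorbis.WayInv (Vorbis.conv u₀) Vorbis.L.setup_malloc.entry (Vorbis.Spec.setup_malloc.spec others frames A))
    (others : List Obj) (frames : List (Nat × FrameLayout)) (A : Arena) (k : Nat) (u : State) (ret : Word)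
    (A6 : Arena) (others6 : List Obj) (v : State) (hat : AtCut6 u₀ others frames A k u ret A6 others6 v) :
    ReachVia Lay μ Vorbis.WayInv v (fun w => ∃ (A' : Arena) (others' : List Obj), AtCut7 u₀ others frames A k u ret A' others' w) := by
  obtain ⟨hbody, hrip, htabs, htW⟩ := hat
  have he := hbody.entry
  have hpre := hbody.pre
  have he0 := he
  have hpre0 := hpre
  v_entry he
  obtain ⟨hap, hlive, hb, hld, hlogobj, hlogin⟩ := hpre
  have hsh := hap.shadow
  have hsp := hsh.rsp
  rw [arg32_def] at hb hld
  -- the two `int` arguments, named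
  generalize hbq : (u.reg .rsi).toNat % 2 ^ 32 = b at hb
  generalize hnq : (u.reg .rdx).toNat % 2 ^ 32 = n at hld
  -- where `*f` is; where the free gap of the arena is
  have hwhere := hlive.where_ hsh.inv hsh.offText (by decide)
  simp only [Vorbis.Off.sizeof.stb_vorbis] at hwhere hlive
  have hgap := obj_off_gap hlive hap.arena hsh.inv
  have hbounds := hap.arena.bounds
  have h1x := hap.arena.AR1x
  have htext : 0x119d40 ≤ A.B := hap.offText
  have hflog := obj_off_log2 hlive hlogobj hsh.inv
  have halog := arena_off_log2 hap.arena hlogobj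
  have hfrm : ∀ bF, bF ∈ frames → (u.reg .rsp).toNat + 8 ≤ bF.1 := fun bF hbF => (hsh.inv.stack.active bF hbF).2.2.1
  have hsx : (Word.ofBV (BitVec.signExtend 64 (Word.part .w32 (u.reg .rsi)))).toNat = b := by
    rw [← hbq, ← arg32_def]
    exact arg32_sext u .rsi (by rw [arg32_def]; omega)
  have hnv : (Word.part .w32 (u.reg .rdx)).toNat = n := by
    rw [← hnq]
    exact Asan.part32_toNat _
  have hfacts := hld.isBlocksize.facts
  have hz2 := size_n2 hnv hld
  have hz4 := size_n4 hnv hld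
  have hz8 := size_n8 hnv hld
  have hshlo : (shadowSpan (A.B + A.S) (A.B + A.T)).lo = 0xC00000 + (A.B + A.S) / 8 := rfl
  have hshhi : (shadowSpan (A.B + A.S) (A.B + A.T)).hi = 0xC00000 + (A.B + A.T + 7) / 8 := rfl
  -- the contract's footprint, named, and its windows
  obtain ⟨FP, hFP⟩ : ∃ FP : List Span, FP =
      [⟨(u.reg .rsp).toNat - 256, (u.reg .rsp).toNat⟩, ⟨(u.reg .rdi).toNat + 8, (u.reg .rdi).toNat + 12⟩, ⟨(u.reg .rdi).toNat + 128, (u.reg .rdi).toNat + 132⟩, ⟨(u.reg .rdi).toNat + 140, (u.reg .rdi).toNat + 144⟩, ⟨(u.reg .rdi).toNat + 1400 + 8 * b, (u.reg .rdi).toNat + 1408 + 8 * b⟩, ⟨(u.reg .rdi).toNat + 1416 + 8 * b, (u.reg .rdi).toNat + 1424 + 8 * b⟩, ⟨(u.reg .rdi).toNat + 1432 + 8 * b, (u.reg .rdi).toNat + 1440 + 8 * b⟩, ⟨(u.reg .rdi).toNat + 1448 + 8 * b, (u.reg .rdi).toNat + 1456 + 8 * b⟩, ⟨(u.reg .rdi).toNat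 + 1464 + 8 * b, (u.reg .rdi).toNat + 1472 + 8 * b⟩,
       ⟨A.B + A.S, A.B + A.T⟩, shadowSpan (A.B + A.S) (A.B + A.T)] := ⟨_, rfl⟩
  have m_st : (⟨(u.reg .rsp).toNat - 256, (u.reg .rsp).toNat⟩ : Span) ∈ FP := by rw [hFP]; simp only [List.mem_cons, true_or]
  have m_f8 : (⟨(u.reg .rdi).toNat + 8, (u.reg .rdi).toNat + 12⟩ : Span) ∈ FP := by rw [hFP]; simp only [List.mem_cons, true_or, or_true]
  have m_f128 : (⟨(u.reg .rdi).toNat + 128, (u.reg .rdi).toNat + 132⟩ : Span) ∈ FP := by rw [hFP]; simp only [List.mem_cons, true_or, or_true]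
  have m_f140 : (⟨(u.reg .rdi).toNat + 140, (u.reg .rdi).toNat + 144⟩ : Span) ∈ FP := by rw [hFP]; simp only [List.mem_cons, true_or, or_true]
  have m_A : (⟨(u.reg .rdi).toNat + 1400 + 8 * b, (u.reg .rdi).toNat + 1408 + 8 * b⟩ : Span) ∈ FP := by rw [hFP]; simp only [List.mem_cons, true_or, or_true]
  have m_B : (⟨(u.reg .rdi).toNat + 1416 + 8 * b, (u.reg .rdi).toNat + 1424 + 8 * b⟩ : Span) ∈ FP := by rw [hFP]; simp only [List.mem_cons, true_or, or_true]
  have m_C : (⟨(u.reg .rdi).toNat + 1432 + 8 * b, (u.reg .rdi).toNat + 1440 + 8 * b⟩ : Span) ∈ FP := by rw [hFP]; simp only [List.mem_cons, true_or, or_true]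
  have m_W : (⟨(u.reg .rdi).toNat + 1448 + 8 * b, (u.reg .rdi).toNat + 1456 + 8 * b⟩ : Span) ∈ FP := by rw [hFP]; simp only [List.mem_cons, true_or, or_true]
  have m_R : (⟨(u.reg .rdi).toNat + 1464 + 8 * b, (u.reg .rdi).toNat + 1472 + 8 * b⟩ : Span) ∈ FP := by rw [hFP]; simp only [List.mem_cons, true_or, or_true]
  have m_gap : (⟨A.B + A.S, A.B + A.T⟩ : Span) ∈ FP := by rw [hFP]; simp only [List.mem_cons, true_or, or_true]
  have m_sh : (shadowSpan (A.B + A.S) (A.B + A.T)) ∈ FP := by rw [hFP]; simp only [List.mem_cons, true_or, or_true]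
  -- the present state: the walker reads these by type
  have hM6 := hbody.mid
  have c_rip : v.rip = Vorbis.L.init_blocksize.cut6 := hrip
  have c_rsp := hbody.rsp
  have c_rbx := hbody.rbx
  have c_rbp := hbody.rbp
  have c_r12 := hbody.r12
  have w_eq : Mem.EqOn Vorbis.L.textLo Vorbis.L.textHi u₀.mem v.mem := hbody.code
  have hdf : v.flags .df = false := (show abiInv _ from hbody.inv).1
  have hmx : v.mxcsr &&& 0x1F80 = 0x1F80 := (show abiInv _ from hbody.inv).2
  have hsse := Vorbis.sseOK_of_abiInv hbody.inv
  have hn8 := hbody.s_n8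
  rw [hnq] at hn8
  rw [hnq, hbq] at htabs htW
  have hsame6 := hbody.same
  simp only [X86.User.Spec.footprint, vspec, hbq] at hsame6
  rw [← hFP] at hsame6
  have hsm6 := h_sm others6 frames A6
  -- ── call 5 (0x10c2fd): bit_reverse[b] = setup_malloc(f, 2·n8), line 1324 ────────────────────────────────────────────────
  u_walk hcode [hμ.vendor] span [Vorbis.L.textLo, Vorbis.L.textHi] side (v_side)
  case call_inv => v_inv
  case pre_10c2fd =>
    have hM : Carry others frames A ((u.reg .rsp).toNat - 88) (u.reg .rdi).toNat A6 others6 s_10c2fd.mem := by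
      refine hM6.frame (by omega) ?_ ?_
      · u_memnorm
        u_eqon
      · v_untouched
    exact hM.arenaPre hlive (by rw [w_rdi]) (by rw [w_rsp]; u_omega)
  have hM : Carry others frames A ((u.reg .rsp).toNat - 88) (u.reg .rdi).toNat A6 others6 s_10c2fd.mem := by
    refine hM6.frame (by omega) ?_ ?_
    · u_memnorm
      u_eqon
    · v_untouched
  have c_rdi7 : s_10c2fd.reg .rdi = u.reg .rdi := w_rdi_10c2fd
  have c_rsi7 : (s_10c2fd.reg .rsi).toNat % 2 ^ 32 = n / 4 := by
    rw [w_rsi_10c2fd]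
    exact add_n8 hfacts.1 hfacts.2.2
  obtain ⟨A7, others7, hM7, hE7, hres7⟩ := hM.malloc (by rw [c_rdi7]) (by rw [w_rsp_10c2fd]; u_omega) c_rsi7 w_post
  have w_eq := Vorbis.conv_code_eqOn w_code
  simp only [X86.User.Spec.footprint, vspec, w_rsp_10c2fd, c_rdi7, c_rsi7] at w_same
  replace w_same := same_shadow (a' := A.B + A.S) (b' := A.B + A.T) w_same (by
    have hbd := hM.arena.bounds
    have hB1 := hM.ext.B
    have hS1 := hM.ext.S
    rcases hres7 with ⟨_, hun⟩ | ⟨_, hrax, _, k1, k2⟩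
    · exact Or.inr ⟨hun, by omega⟩
    · exact Or.inl ⟨by omega, by omega⟩)
  rw [w_mem_10c2fd] at w_same
  have hfr7 : Mem.EqOn ((u.reg .rsp).toNat - 64) ((u.reg .rsp).toNat + 8) v.mem s_10c2fdr.mem := by
    u_eqon
  have hfn7 : Mem.EqOn ((u.reg .rsp).toNat - 84) ((u.reg .rsp).toNat - 80) v.mem s_10c2fdr.mem := by
    u_eqon
  have hA7 : Mem.EqOn ((u.reg .rdi).toNat + 1400 + 8 * b) ((u.reg .rdi).toNat + 1408 + 8 * b) v.mem s_10c2fdr.mem := by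
    u_eqon
  have hB7 : Mem.EqOn ((u.reg .rdi).toNat + 1416 + 8 * b) ((u.reg .rdi).toNat + 1424 + 8 * b) v.mem s_10c2fdr.mem := by
    u_eqon
  have hC7 : Mem.EqOn ((u.reg .rdi).toNat + 1432 + 8 * b) ((u.reg .rdi).toNat + 1440 + 8 * b) v.mem s_10c2fdr.mem := by
    u_eqon
  have hW7 : Mem.EqOn ((u.reg .rdi).toNat + 1448 + 8 * b) ((u.reg .rdi).toNat + 1456 + 8 * b) v.mem s_10c2fdr.mem := by
    u_eqon
  have hseg7 : Mem.SameExcept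
      [⟨(u.reg .rsp).toNat - 256, (u.reg .rsp).toNat⟩,
       ⟨(u.reg .rdi).toNat + 8, (u.reg .rdi).toNat + 12⟩,
       ⟨(u.reg .rdi).toNat + 128, (u.reg .rdi).toNat + 132⟩,
       shadowSpan (A.B + A.S) (A.B + A.T)] v.mem s_10c2fdr.mem := by
    u_same
  have hsame7 : Mem.SameExcept FP u.mem s_10c2fdr.mem := by
    refine hsame6.trans (widenWins hseg7 ?_)
    intro w hw
    simp only [List.mem_cons, List.not_mem_nil, or_false] at hw
    rcases hw with rfl | rfl | rfl | rfl
    · exact Or.inr ⟨_, m_st, Nat.le_refl _, Nat.le_refl _⟩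
    · exact Or.inr ⟨_, m_f8, Nat.le_refl _, Nat.le_refl _⟩
    · exact Or.inr ⟨_, m_f128, Nat.le_refl _, Nat.le_refl _⟩
    · exact Or.inr ⟨_, m_sh, Nat.le_refl _, Nat.le_refl _⟩
  -- the exit: `AtCut7` for the returned state
  refine ReachVia.done ⟨A7, others7, ⟨⟨he0, hpre0, w_eq, w_inv, w_rsp, (w_kept .rbx rfl).trans c_rbx, (w_kept .rbp rfl).trans c_rbp,
    (w_kept .r12 rfl).trans c_r12, ?_, ?_, ?_, ?_, ?_, ?_, ?_, ?_, ?_, ?_, ?_, hM7⟩, w_rip, ?_, ?_, ?_⟩⟩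
  · exact slot64_of_eqOn hfr7 hbody.s_ret (by u_omega) (by u_omega) (by u_omega)
  · exact slot64_of_eqOn hfr7 hbody.s_r15 (by u_omega) (by u_omega) (by u_omega)
  · exact slot64_of_eqOn hfr7 hbody.s_r14 (by u_omega) (by u_omega) (by u_omega)
  · exact slot64_of_eqOn hfr7 hbody.s_r13 (by u_omega) (by u_omega) (by u_omega)
  · exact slot64_of_eqOn hfr7 hbody.s_r12 (by u_omega) (by u_omega) (by u_omega)
  · exact slot64_of_eqOn hfr7 hbody.s_rbp (by u_omega) (by u_omega) (by u_omega)
  · exact slot64_of_eqOn hfr7 hbody.s_rbx (by u_omega) (by u_omega) (by u_omega)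
  · exact slot_of_eqOn hfn7 hbody.s_n2 (by u_omega) (by u_omega) (by u_omega)
  · exact slot_of_eqOn hfr7 hbody.s_n4 (by u_omega) (by u_omega) (by u_omega)
  · exact slot_of_eqOn hfr7 hbody.s_n8 (by u_omega) (by u_omega) (by u_omega)
  · simp only [X86.User.Spec.footprint, vspec, hbq]
    rw [← hFP]
    exact hsame7
  · rw [hnq, hbq]
    exact htabs.carry hE7 (by omega) hb hA7 hB7 hC7
  · rw [hnq, hbq]
    have eW : stb_vorbis.window s_10c2fdr.mem (u.reg .rdi).toNat b = stb_vorbis.window v.mem (u.reg .rdi).toNat b := by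
      simp only [vacc, voff]
      exact ptr_of_eqOn (a := (u.reg .rdi).toNat + 1448 + 8 * b) hW7 (by omega) (by omega)
    rw [eW]
    exact htW.mono hE7
  · rw [hnq]
    rcases hres7 with ⟨h0, _⟩ | ⟨_, _, hs, k1, k2⟩
    · exact Or.inl h0
    · exact Or.inr ⟨hs, k1, k2⟩

end Vorbis.Spec.init_blocksize
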